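/-
  start_decoder, FIRST HALF (CONTRACTS 113, parts 1 and C; segments `.1 … .9`, `C1 … C16`): the entry assertions
  `StartDecoder.At2 … At9`, `AtC1 … AtC16` of the family of Vorbis/Spec/StartDecoderAt.lean (which has `At1`, `AtF1`, `AtERR`).

      point      address    C lines      what holds (besides `Frame`: rsp, saved registers, poisoned frame, code, footprint, AR7)
      At2        0x113a2b   3614         P3 ; rbp = rdi = f                                                       (after the prologue)
      At3        0x113c0c   3642         SD 0 (= P3 + first_decode + ONE20 + Z10) ; next_seg = 0
      At4        0x113d3f   3669         SD 1 (HD1 – HD3) ; next_seg = 0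
      At5        0x113e77   3676         SD 1 ; r13 = i ≤ 6                                                       (head of loop 3676)
      At6        0x113f28   3682         SD 1 with the vendor block: r12 = i ≤ r13 = len ≤ 7FFFFFFEH, Blk ⟨vendor, len + 1⟩   (loop 3682)
      At7        0x11409e   3695         SD 1 with `CommentOK … i`, dword [R+18H] = i                              (head of loop 3695)
      At8        0x114127   3707         SD 1 with `CommentsOK` (CM1 – CM3 complete)
      At9        0x114184   3721         SD 2 (Z24 from here on) ; bytes_in_seg = 0
      AtC1       0x11428b   3746         SD4 0 (= SD 3 + ZF 0: the fresh codebooks block is all zero) ; rbp = f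
      AtC2 i     0x114298   3746         SD4 i ; qword [R+18H] = f, dword [R+30H] = i                              (head of the codebook loop)
      AtC3 … AtC9, AtC11 … AtC15 (i)     `Cur i` (SD4 i with temp blocks, r14 = c = cb(i)) + the state of the book under construction,
                                         for ghost snapshots `A2 A3 Ai` of the arena (the ages of the blocks)
      AtC10 i    0x114788   3746         SD4 (i + 1) with dword [R+30H] still i                                   (`++i`)
      AtC16      0x1151bf   3956         SD4 count ; qword [R+18H] = f                                             (after the loop)

  TWO WEAKER FORMS OF `Real.SD len k`, because two of its clauses fail in the middle of a section:
      `SDw len k …`   = `Real.SD len k` without `noTemps`, `commentZero`, `comment` (`SDw.of_sd`, `SDw.toSD`): inside the comment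
                        section `vendor` is no longer zero and CM1 – CM3 hold only up to the loop counter (At6, At7, At8 — Z24 is
                        not yet there, so `SD 2` cannot be used before At9); inside an iteration of the codebook loop temp blocks are
                        outstanding (`Cur`).
      `Cur g i A2 A3 Ai A v`   the codebook loop's CUR(i) of CONTRACTS: FRM ∧ GLB(i) ∧ ZF(i+1) ∧ i < count ∧ dword [R+30H] = i ∧ r14 = cb(i).
  Every error exit goes to `AtERR` with `Failed` (SD.ERR): from a point with `Real.SD`, `Failed.of_sd`; from a point with `SDw`,
  `SDw.failed` (given H1 = CM2 of the moment).

  TWO RECORDS NEXT TO THE INVARIANT (S5's extension of the shared file, needed at EVERY point):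
      `hand : g.Hand A`      `*f`, the input, the six globals as live OBJECTS of `A.2` / the callers' frames, the arena above the text:
                             what the callees' preconditions (`LiveIn others frames f 1808`, …) are discharged from
      over the ARENA's       every block fact a segment establishes is stated over THE ARENA'S OWN block predicate (each comes out
      blocks                 of `setup_malloc`); the instance over `g.Blk A` that `Real.SD` asks for follows by `X.reblk` with `up`
                             (= `runBlk_setup`). Up to `At9` over the current `A.1.Blk` (`own : Own k A.1.Blk …`); IN THE CODEBOOK
                             LOOP WITH THE AGES OF THE BLOCKS (section "THE AGES OF THE BLOCKS" below; Vorbis/Arena.lean §9): ghost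
                             SNAPSHOTS `A2 A3 Ai` (+ `Aw`, `Am`) of the arena, the finished things over a snapshot's `Blk`
                             (`BookTrans`), the tables of book `i` under construction over `Since <snapshot> A.1` — so that a
                             store into a table under construction provably keeps everything older (`BookTrans.store_young`,
                             `.store_book`, `Built.store_codewords`, `InC13.store_mu` …). `BodyC<k>.own` / `Cur.own` give the
                             records `Own 3` / `OwnUpTo i` over `A.1.Blk` back. (For temp blocks nothing: they are dead at SD.5,
                             and a temp block is disjoint from every setup block: `ArenaOK.blk_tblock_disjoint`.)
      the form               `AtC<k> u₀ g i v := ∃ A …, BodyC<k> u₀ g i A … v` as everywhere; at the loop's own points (C1, C2, C10, C16)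
                             `BodyC<k>` is a structure with a field `ages : ∃ A2 A3, BookTrans A2 A3 A.1 A.1 …`; inside an iteration
                             `BodyC<k> … := ∃ A2 A3 Ai …, InC<k> u₀ g i A2 A3 Ai … A … v` and `InC<k>` is the structure with the clauses.

  NOTATION of the codebook part (CONTRACTS, part C): c = cb(i) ; D dimensions, E entries, CL codeword_lengths, VB value_bits,
  LT lookup_type, SP sparse, LV lookup_values, MU multiplicands, CW codewords, SC sorted_codewords, SV sorted_values,
  SE sorted_entries ; P = 1FFFFFFFH ; temp blocks P1 = (lengths, E), P2 = (CW, 4·SE), P3 = (values, 4·SE), P4 = (mults, 2·LV).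
-/
import Vorbis.Spec.StartDecoderAt
namespace Vorbis.Spec.StartDecoder
open X86 X86.User Asan

/-! ### `Real.SD len k` without the clauses that fail in the middle of a section -/

/-- **`Real.SD len k` without `noTemps`, `commentZero`, `comment`** (and without the clauses of the sections after the codebooks,
which are vacuous for `k ≤ 4`): the environment of a check site, ONE20 / Z10 / Z24 as far as valid at `k`, ArenaOK, `Bits f`,
`first_decode = 1`, `discard_samples_deferred = 0`, HD1 – HD3 (k ≥ 1), CB0 non-NULL (k ≥ 3), the zero rest of `*f`. -/
structure SDw (len k : Nat) (A : Arena × List Obj) (Blk : Block → Prop) (Live : Nat → Prop) (mem : Mem) (f R : Nat) :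
    Prop where
  env : Env Blk Live mem
  frame : SDFrameConsts k mem R
  arena : ArenaOK A.1 A.2 mem f
  setups : ∀ B, A.1.Blk B → Blk B
  bits : Bits Blk len mem f
  first : stb_vorbis.first_decode mem f = 1
  discard0 : stb_vorbis.discard_samples_deferred mem f = 0
  header : 1 ≤ k → HeaderOK mem f
  cb0 : 3 ≤ k → CB0 Blk mem f ∧ stb_vorbis.codebooks mem f ≠ 0
  rest : RestZero mem f (restFrom k)

namespace SDw
variable {len k : Nat} {A : Arena × List Obj} {Blk : Block → Prop} {Live : Nat → Prop} {mem : Mem} {f R : Nat}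

/-- A cut point of start_decoder gives the weaker form. -/
theorem of_sd (h : Real.SD len k A Blk Live mem f R) : SDw len k A Blk Live mem f R :=
  ⟨h.env, h.frame, h.arena, h.setups, h.bits, h.first, h.discard0, h.header, h.cb0, h.rest⟩

/-- **Back to `Real.SD len k`, `k ≤ 4`**: no temp block outstanding, and the comment clause of the point (`k ≤ 1`: the three
fields still zero; `k ≥ 2`: CM1 – CM3). -/
theorem toSD (h : SDw len k A Blk Live mem f R) (hk : k ≤ 4) (hno : A.1.temps = [])
    (hz : k ≤ 1 → ZeroRange mem f Off.stb_vorbis.vendor Off.stb_vorbis.stream) (hc : 2 ≤ k → CommentsOK Blk mem f) :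
    Real.SD len k A Blk Live mem f R :=
  { env := h.env
    frame := h.frame
    arena := h.arena
    setups := h.setups
    noTemps := hno
    bits := h.bits
    first := h.first
    discard0 := h.discard0
    header := h.header
    commentZero := hz
    comment := hc
    cb0 := h.cb0
    codebooks := fun h5 => absurd h5 (by omega)
    floor := fun h6 => absurd h6 (by omega)
    lfl := fun h6 _ => absurd h6 (by omega)
    residue := fun h7 => absurd h7 (by omega)
    mapping := fun h8 => absurd h8 (by omega)
    mode := fun h9 => absurd h9 (by omega)
    buffers := fun h10 => absurd h10 (by omega)
    mdct := fun h11 => absurd h11 (by omega)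
    temp := fun h12 => absurd h12 (by omega)
    rest := h.rest }

/-- **`DeinitOK(&p)` from the weaker form, `k ≤ 4`**, given H1 (= CM2 as it is at the moment: the table of comment pointers is a
block of `8 · comment_list_length` bytes, or the length is not positive). H2, H3, H5 from the zero rest; H4 from CB0 or the zero
rest. -/
theorem deinitOK (h : SDw len k A Blk Live mem f R) (hk : k ≤ 4) (h1 : H1 Blk mem f) : DeinitOK Blk mem f := by
  refine ⟨Bits.ob1 h.bits, ArenaOK.alloc_buffer_ne_zero h.arena, h1, ?_, ?_, ?_, ?_⟩
  · exact H2.of_null (h.rest.residue_null (restFrom_le_residue (by omega))).1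
  · exact H3.of_null (h.rest.residue_null (restFrom_le_residue (by omega))).1
  · by_cases h3 : 3 ≤ k
    · exact CB0.h4 (h.cb0 h3).1
    · exact H4.of_null (h.rest.codebooks_null (restFrom_le_codebook (by omega)))
  · exact H5.of_null (h.rest.mapping_null (restFrom_le_mapping (by omega)))

end SDw

/-- **An error exit from a point with the weaker form**: SD.ERR (`Failed`), given H1 of the moment. Temp blocks may be outstanding
(`ArenaErr` asks nothing of them). -/
theorem SDw.failed {g : Ghost} {A : Arena × List Obj} {mem : Mem} {k : Nat}
    (h : SDw g.len k A (g.Blk A) (g.Live A) mem g.f g.R) (hk : k ≤ 4) (h1 : H1 (g.Blk A) mem g.f) :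
    Failed g.len g.f (g.Live A) A mem := by
  refine ⟨⟨h.env, h.deinitOK hk h1, h.bits⟩, h.arena.AR1, ?_⟩
  intro o ho
  apply h.arena.AR6 o
  unfold Arena.objs
  exact List.mem_append_left _ ho

/-- CM2 is H1 (for any loop counter): what `SDw.failed` asks for inside the comment section. -/
theorem h1_of_cm2 {Blk : Block → Prop} {mem : Mem} {f : Nat} (h : CM2 Blk mem f) : H1 Blk mem f := by
  cases h with
  | inl h0 => exact Or.inl h0
  | inr h1 => exact Or.inr h1.2

/-- A setup block of the ghost arena is a block of the function's block predicate: the `hB` of every `reblk`. -/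
theorem up (g : Ghost) (A : Arena × List Obj) (B : Block) (h : A.1.Blk B) : g.Blk A B := runBlk_setup h

/-- **The record "which block is an arena block" at the head of iteration `i` of the codebook loop** (`Own 3`: CM1 – CM3, CB0,
`codebooks ≠ NULL`; and K1 – K6 of the books below `i`), over the block predicate `Ab` (= `A.1.Blk`). At `i = codebook_count` it
is `Own 5` (`OwnUpTo.own5`). -/
structure OwnUpTo (i : Nat) (Ab : Block → Prop) (mem : Mem) (f : Nat) : Prop where
  own : Own 3 Ab mem f
  books : ∀ j, j < i → CodebookOK Ab mem (stb_vorbis.codebooks_at mem f j)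

/-- Nothing finished yet. -/
theorem OwnUpTo.zero {Ab : Block → Prop} {mem : Mem} {f : Nat} (h : Own 3 Ab mem f) : OwnUpTo 0 Ab mem f :=
  ⟨h, fun j hj => absurd hj (Nat.not_lt_zero j)⟩

/-- One more book. -/
theorem OwnUpTo.succ {i : Nat} {Ab : Block → Prop} {mem : Mem} {f : Nat} (h : OwnUpTo i Ab mem f)
    (hnew : CodebookOK Ab mem (stb_vorbis.codebooks_at mem f i)) : OwnUpTo (i + 1) Ab mem f := by
  refine ⟨h.own, ?_⟩
  intro j hj
  by_cases e : j = i
  · rw [e]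
    exact hnew
  · exact h.books j (by omega)

/-- After the loop: every codebook. -/
theorem OwnUpTo.own5 {i : Nat} {Ab : Block → Prop} {mem : Mem} {f : Nat} (h : OwnUpTo i Ab mem f)
    (hi : (i : Int) = stb_vorbis.codebook_count mem f) : Own 5 Ab mem f :=
  { comment := fun _ => h.own.comment (by omega)
    cb0 := fun _ => h.own.cb0 (by omega)
    nonnull := fun _ => h.own.nonnull (by omega)
    books := fun _ j hj => h.books j (by omega)
    floor := fun h6 => absurd h6 (by omega)
    residue := fun h7 => absurd h7 (by omega)
    mapping := fun h8 => absurd h8 (by omega) }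

/-! ### The steps between the points, on the invariant side (same memory: the machine-level frame is the segment's work)

Each lemma builds the point a segment EXITS to from clauses about the EXIT memory: what the segment itself establishes, and the
clauses of the entry point that survive it (where the entry point as a whole survives — nothing it constrains is stored to — the
lemma takes it whole). They are what the last lines of a segment's proof use, and they show that no point of the chain asks for
more than its predecessor and the code in between provide (non-vacuity). -/

/-- **P3 → `SD 0`** (segment `.2`): the clauses of P3 that survive the segment (the environment, ArenaOK with the arena still fresh,
`Bits f` — each carried to the exit memory by its own frame lemma; P3 ITSELF does not survive: `first_decode` lies in its zero range
and `stream` has moved), `first_decode = 1` stored, ONE20 and Z10 spilled, `discard_samples_deferred` still 0, the two zero ranges. -/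
theorem sd0_of_parts {len : Nat} {A : Arena × List Obj} {Blk : Block → Prop} {Live : Nat → Prop} {mem : Mem} {f R : Nat}
    (henv : Env Blk Live mem) (harena : ArenaOK A.1 A.2 mem f) (hno : A.1.temps = []) (hbits : Bits Blk len mem f)
    (hc : SDFrameConsts 0 mem R) (hs : ∀ B, A.1.Blk B → Blk B)
    (hfirst : stb_vorbis.first_decode mem f = 1) (hd : stb_vorbis.discard_samples_deferred mem f = 0)
    (hz : ZeroRange mem f Off.stb_vorbis.vendor Off.stb_vorbis.stream)
    (hr : RestZero mem f Off.stb_vorbis.codebook_count) : Real.SD len 0 A Blk Live mem f R :=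
  SDw.toSD (k := 0)
    { env := henv
      frame := hc
      arena := harena
      setups := hs
      bits := hbits
      first := hfirst
      discard0 := hd
      header := fun h1 => absurd h1 (by omega)
      cb0 := fun h3 => absurd h3 (by omega)
      rest := hr }
    (by omega) hno (fun _ => hz) (fun h2 => absurd h2 (by omega))

/-- The zero ranges `sd0_of_parts` asks for, AT `At2` (P3's memory): segment `.2` stores `first_decode` at 1749 and the callees' paging /
stream fields only, so `ZeroRange.frame` carries both to its exit memory. (`discard_samples_deferred`, offset 1784, likewise: `h.h0.z2`.) -/
theorem p3_zero {len : Nat} {A : Arena × List Obj} {Blk : Block → Prop} {Live : Nat → Prop} {mem : Mem} {f : Nat}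
    (h : Real.P3 len A Blk Live mem f) :
    ZeroRange mem f Off.stb_vorbis.vendor Off.stb_vorbis.stream ∧ RestZero mem f Off.stb_vorbis.codebook_count := by
  have h1 := h.h0.z0
  have h2 := h.h0.z2
  unfold RestZero
  simp only [voff] at h1 h2 ⊢
  exact ⟨h1.mono (by omega) (by omega), h2.mono (by omega) (by omega)⟩

/-- **`SD 0` → `SD 1`** (segment `.3`): HD1 – HD3 established. -/
theorem sd1_of_sd0 {len : Nat} {A : Arena × List Obj} {Blk : Block → Prop} {Live : Nat → Prop} {mem : Mem} {f R : Nat}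
    (h : Real.SD len 0 A Blk Live mem f R) (hh : HeaderOK mem f) : Real.SD len 1 A Blk Live mem f R :=
  SDw.toSD (k := 1)
    { env := h.env
      frame := ⟨h.frame.aligned, h.frame.shadowIdx, h.frame.one20, fun _ => h.frame.z10 (by omega),
        fun h2 _ => absurd h2 (by omega)⟩
      arena := h.arena
      setups := h.setups
      bits := h.bits
      first := h.first
      discard0 := h.discard0
      header := fun _ => hh
      cb0 := fun h3 => absurd h3 (by omega)
      rest := h.rest }
    (by omega) h.noTemps (fun _ => h.commentZero (by omega)) (fun h2 => absurd h2 (by omega))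

/-- **`SDw 1` + CM1 – CM3 + Z24 → `SD 2`** (segment `.8`: the do-while of line 3715 left `len = 0` in dword [R+24H]). -/
theorem sd2_of_sdw1 {len : Nat} {A : Arena × List Obj} {Blk : Block → Prop} {Live : Nat → Prop} {mem : Mem} {f R : Nat}
    (h : SDw len 1 A Blk Live mem f R) (hno : A.1.temps = []) (hc : CommentsOK Blk mem f)
    (hz24 : mem.u32 (R + 0x24) = 0) : Real.SD len 2 A Blk Live mem f R :=
  SDw.toSD (k := 2)
    { env := h.env
      frame := ⟨h.frame.aligned, h.frame.shadowIdx, h.frame.one20, fun _ => h.frame.z10 (by omega), fun _ _ => hz24⟩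
      arena := h.arena
      setups := h.setups
      bits := h.bits
      first := h.first
      discard0 := h.discard0
      header := fun _ => h.header (by omega)
      cb0 := fun h3 => absurd h3 (by omega)
      rest := h.rest }
    (by omega) hno (fun h1 => absurd h1 (by omega)) (fun _ => hc)

/-- **`SD 2` → `SD4 0`** (segment `.9`): the clauses of `SD 2` that survive the segment, in the exit memory (`SD 2` itself does not:
its zero rest starts at `codebook_count`), CM1 – CM3, `codebook_count` and `codebooks` stored (CB0, non-NULL), the block zero-filled
(ZF 0); the zero rest now starts at `floor_count`. -/
theorem sd4_of_parts {len : Nat} {A : Arena × List Obj} {Blk : Block → Prop} {Live : Nat → Prop} {mem : Mem} {f R : Nat}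
    (henv : Env Blk Live mem) (hc : SDFrameConsts 2 mem R) (harena : ArenaOK A.1 A.2 mem f) (hs : ∀ B, A.1.Blk B → Blk B)
    (hno : A.1.temps = []) (hbits : Bits Blk len mem f) (hfirst : stb_vorbis.first_decode mem f = 1)
    (hd : stb_vorbis.discard_samples_deferred mem f = 0) (hh : HeaderOK mem f) (hcm : CommentsOK Blk mem f)
    (hcb : CB0 Blk mem f) (hne : stb_vorbis.codebooks mem f ≠ 0)
    (hcnt : 0 ≤ stb_vorbis.codebook_count mem f)
    (hz : ZF mem (stb_vorbis.codebooks mem f) (stb_vorbis.codebook_count mem f).toNat 0)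
    (hr : RestZero mem f Off.stb_vorbis.floor_count) : Real.SD4 len 0 A Blk Live mem f R := by
  have h3 : Real.SD len 3 A Blk Live mem f R :=
    SDw.toSD (k := 3)
      { env := henv
        frame := ⟨hc.aligned, hc.shadowIdx, hc.one20, fun _ => hc.z10 (by omega), fun _ _ => hc.z24 (by omega) (by omega)⟩
        arena := harena
        setups := hs
        bits := hbits
        first := hfirst
        discard0 := hd
        header := fun _ => hh
        cb0 := fun _ => ⟨hcb, hne⟩
        rest := hr }
      (by omega) hno (fun h1 => absurd h1 (by omega)) (fun _ => hcm)
  exact SD4.of_SD3 h3 hcnt hz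

/-- **`SD4 count` → `SD 5`** (segment `C16`): every codebook finished; the time-domain loop assigns nothing. -/
theorem sd5_of_sd4 {len i : Nat} {A : Arena × List Obj} {Blk : Block → Prop} {Live : Nat → Prop} {mem : Mem} {f R : Nat}
    (h : Real.SD4 len i A Blk Live mem f R) (hi : (i : Int) = stb_vorbis.codebook_count mem f) :
    Real.SD len 5 A Blk Live mem f R :=
  { h.toSD with
    frame := ⟨h.frame.aligned, h.frame.shadowIdx, h.frame.one20, fun _ => h.frame.z10 (by omega),
      fun _ _ => h.frame.z24 (by omega) (by omega)⟩
    header := fun _ => h.header (by omega)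
    commentZero := fun h1 => absurd h1 (by omega)
    comment := fun _ => h.comment (by omega)
    cb0 := fun _ => h.cb0 (by omega)
    codebooks := fun _ => SD4.codebooksOK h hi
    floor := fun h6 => absurd h6 (by omega)
    lfl := fun h6 _ => absurd h6 (by omega)
    residue := fun h7 => absurd h7 (by omega)
    mapping := fun h8 => absurd h8 (by omega)
    mode := fun h9 => absurd h9 (by omega)
    buffers := fun h10 => absurd h10 (by omega)
    mdct := fun h11 => absurd h11 (by omega)
    temp := fun h12 => absurd h12 (by omega)
    rest := h.rest }

/-! ### Part 1: the identification header and the comment header -/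

/-- **`At2`, 0x113a2b** (exit of `.1`, entry of `.2`; C line 3614): the prologue is done — six pushes, `sub rsp, 598H`, the three
header words of the frame, `[R+8] = base >> 3`, the 11 shadow stores: the frame is POISONED (`Frame.shadow`). CORE: point P3 still
holds (nothing of `*f` assigned: H0′; `next_seg = 0`, `segment_count = 0` are in H0), now with the own frame's objects live.
rbp = f and rdi = f (0x113a2b is `lea rdi, [rdi+6D5H]`); rbx = base >> 3 (dead). ONE20 / Z10 are NOT yet there. -/
structure Body2 (u₀ : State) (g : Ghost) (A : Arena × List Obj) (v : State) : Prop where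
  frame : Frame u₀ g pc_2 A v
  hand : g.Hand A
  rbp : v.reg .rbp = addr g.f
  rdi : v.reg .rdi = addr g.f
  p3 : Real.P3 g.len A (g.Blk A) (g.Live A) v.mem g.f

/-- `At2`: `Body2` for some ghost arena (here still the entry's, up to `Extends`). -/
def At2 (u₀ : State) (g : Ghost) (v : State) : Prop := ∃ A, Body2 u₀ g A v

/-- **`At3`, 0x113c0c** (exit of `.2`, entry of `.3`; line 3642): CORE ; Z10 ; ONE20 ; H0′ with `first_decode = 1` assigned = point
`SD 0` ; `next_seg = 0` (the first page is started; get8 / getn / get32 do not touch it: the second start_page needs it). rbp = f. -/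
structure Body3 (u₀ : State) (g : Ghost) (A : Arena × List Obj) (v : State) : Prop where
  frame : Frame u₀ g pc_3 A v
  hand : g.Hand A
  rbp : v.reg .rbp = addr g.f
  sd : Real.SD g.len 0 A (g.Blk A) (g.Live A) v.mem g.f g.R
  next_seg : stb_vorbis.next_seg v.mem g.f = 0

/-- `At3`: `Body3` for some ghost arena. -/
def At3 (u₀ : State) (g : Ghost) (v : State) : Prop := ∃ A, Body3 u₀ g A v

/-- **`At4`, 0x113d3f** (exit of `.3`, entry of `.4`; line 3669): CORE ; Z10 ; ONE20 ; HD1 – HD3 = point `SD 1` ; vendor … all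
NULL / 0 (`commentZero`, `rest`) ; `next_seg = 0`. rbp = f. -/
structure Body4 (u₀ : State) (g : Ghost) (A : Arena × List Obj) (v : State) : Prop where
  frame : Frame u₀ g pc_4 A v
  hand : g.Hand A
  rbp : v.reg .rbp = addr g.f
  sd : Real.SD g.len 1 A (g.Blk A) (g.Live A) v.mem g.f g.R
  next_seg : stb_vorbis.next_seg v.mem g.f = 0

/-- `At4`: `Body4` for some ghost arena. -/
def At4 (u₀ : State) (g : Ghost) (v : State) : Prop := ∃ A, Body4 u₀ g A v

/-- **`At5`, 0x113e77** (exit of `.4`, entry of `.5` = head of loop 3676 `for (i=0; i < 6; ++i) header[i] = get8_packet(f)`):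
`SD 1` ; r13d = i, 0 ≤ i ≤ 6 (a 32-bit `mov` / `add`: the whole of r13 is `i`). rbp = f. First arrival: i = 0. -/
structure Body5 (u₀ : State) (g : Ghost) (A : Arena × List Obj) (i : Nat) (v : State) : Prop where
  frame : Frame u₀ g pc_5 A v
  hand : g.Hand A
  rbp : v.reg .rbp = addr g.f
  sd : Real.SD g.len 1 A (g.Blk A) (g.Live A) v.mem g.f g.R
  r13 : v.reg .r13 = addr i
  i_le : i ≤ 6

/-- `At5`: `Body5` for some ghost arena and some counter `i ≤ 6`. -/
def At5 (u₀ : State) (g : Ghost) (v : State) : Prop := ∃ A i, Body5 u₀ g A i v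

/-- **`At6`, 0x113f28** (exit of `.5`, entry of `.6` = head of loop 3682 `for (i=0; i < len; ++i) f->vendor[i] = …`): `SD 1`
except that `f->vendor` is now the block of EXACTLY `len + 1` bytes (CM1; FIX 1 gave `len ≤ 7FFFFFFEH`); r12d = i, r13d = len,
0 ≤ i ≤ len; `comment_list_length = 0`, `comment_list = NULL`, everything later = H0. rbp = f. First arrival: i = 0. -/
structure Body6 (u₀ : State) (g : Ghost) (A : Arena × List Obj) (i len : Nat) (v : State) : Prop where
  frame : Frame u₀ g pc_6 A v
  hand : g.Hand A
  rbp : v.reg .rbp = addr g.f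
  sd : SDw g.len 1 A (g.Blk A) (g.Live A) v.mem g.f g.R
  noTemps : A.1.temps = []
  r12 : v.reg .r12 = addr i
  r13 : v.reg .r13 = addr len
  i_le : i ≤ len
  len_le : len ≤ 0x7ffffffe
  /-- CM1 with the ghost length made explicit; a block of the ARENA -/
  vendor : A.1.Blk ⟨stb_vorbis.vendor v.mem g.f, len + 1⟩
  length0 : stb_vorbis.comment_list_length v.mem g.f = 0
  list0 : stb_vorbis.comment_list v.mem g.f = 0

/-- `At6`: `Body6` for some ghost arena, counter and vendor length. -/
def At6 (u₀ : State) (g : Ghost) (v : State) : Prop := ∃ A i len, Body6 u₀ g A i len v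

/-- **`At7`, 0x11409e** (exit of `.6`, entry of `.7` = head of loop 3695 `for (i=0; i < f->comment_list_length; ++i)`): `SD 1`
with the comment section under way: dword [R+18H] = i ≥ 0 ; `CommentOK … i` = CM1 ∧ CM2 (`n ≤ 0`, or `1 ≤ n ≤ 0FFFFFFFH` and
`comment_list = Block(8·n)`) ∧ CM3 for indices `< i`, the words at and above `i` NULL (FIX 12's zero fill) ∧ (`i ≤ n` or `i = 0`).
rbp = f. First arrival: i = 0. -/
structure Body7 (u₀ : State) (g : Ghost) (A : Arena × List Obj) (i : Nat) (v : State) : Prop where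
  frame : Frame u₀ g pc_7 A v
  hand : g.Hand A
  rbp : v.reg .rbp = addr g.f
  sd : SDw g.len 1 A (g.Blk A) (g.Live A) v.mem g.f g.R
  noTemps : A.1.temps = []
  /-- the loop counter's spill slot (i of line 3695) -/
  slot_i : v.mem.u32 (g.R + 0x18) = i
  i_le : i ≤ 0x0FFFFFFF
  comment : CommentOK A.1.Blk v.mem g.f i

/-- `At7`: `Body7` for some ghost arena and counter. -/
def At7 (u₀ : State) (g : Ghost) (v : State) : Prop := ∃ A i, Body7 u₀ g A i v

/-- **`At8`, 0x114127** (exit of `.7`, entry of `.8`; line 3707): `SD 1` with CM1 – CM3 complete (`CommentsOK`: all `n` strings).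
Z24 is NOT yet there (the slot is written inside this segment, 0x11415f). rbp = f. -/
structure Body8 (u₀ : State) (g : Ghost) (A : Arena × List Obj) (v : State) : Prop where
  frame : Frame u₀ g pc_8 A v
  hand : g.Hand A
  rbp : v.reg .rbp = addr g.f
  sd : SDw g.len 1 A (g.Blk A) (g.Live A) v.mem g.f g.R
  noTemps : A.1.temps = []
  comment : CommentsOK A.1.Blk v.mem g.f

/-- `At8`: `Body8` for some ghost arena. -/
def At8 (u₀ : State) (g : Ghost) (v : State) : Prop := ∃ A, Body8 u₀ g A v

/-- **`At9`, 0x114184** (exit of `.8`, entry of `.9`; line 3721): point `SD 2` — CORE ; Z10 ; ONE20 ; **Z24** (the do-while of line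
3715 left with `len = 0` in dword [R+24H]) ; HD1 – HD3 ; CM1 – CM3 ; `codebooks = NULL`, `codebook_count = 0` and everything
later = H0 ; `bytes_in_seg = 0`. rbp = f. -/
structure Body9 (u₀ : State) (g : Ghost) (A : Arena × List Obj) (v : State) : Prop where
  frame : Frame u₀ g pc_9 A v
  hand : g.Hand A
  rbp : v.reg .rbp = addr g.f
  sd : Real.SD g.len 2 A (g.Blk A) (g.Live A) v.mem g.f g.R
  /-- CM1 – CM3 over the arena's blocks -/
  own : Own 2 A.1.Blk v.mem g.f
  bytes0 : stb_vorbis.bytes_in_seg v.mem g.f = 0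

/-- `At9`: `Body9` for some ghost arena. -/
def At9 (u₀ : State) (g : Ghost) (v : State) : Prop := ∃ A, Body9 u₀ g A v

/-! ### THE AGES OF THE BLOCKS in the codebook section (Vorbis/Arena.lean §9: ghost snapshots, `Since`)

A store into a block UNDER CONSTRUCTION — the `lengths` array, `codewords`, `codeword_lengths`, `sorted_codewords`, `sorted_values`,
`multiplicands` of book `i`; the struct `cb(i)` inside the codebooks block — must KEEP every block the invariant reads: the table of
comment pointers, the codebooks block (every struct), the `sorted_values` block of every finished book, and the older tables of
book `i` itself. Two setup blocks are the same block or disjoint, so what is needed is that they are DIFFERENT blocks — known only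
at the allocating call (`ArenaOK.since_pushSetup`), and forgotten at the next cut point by an assertion that states everything over
the current `A.1.Blk`. So the assertions of the codebook loop carry GHOST SNAPSHOTS of the arena, each taken at a cut point in whose
segment the next allocation really happens (checked against c/vorbis_f_insns.txt; the return addresses of the `setup_malloc` calls
are the `cut in start_decoder.<seg>` labels):

      A2   the arena at `At9` (SD.2, 0x114184)         the codebooks block is allocated in segment `.9` (call 0x114240)
      A3   the arena at `AtC1` (0x11428b)              = A2 + the codebooks block; segment `C1` allocates nothing
      Ai   the arena at `AtC2 i` (0x114298)            the head of iteration `i`; `lengths` is allocated in `C2` (0x1144bd; sparse: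
                                                       the temp block, 0x1143f3); the conversion's `codeword_lengths` in `C5` (0x1145e4)
      Aw   the arena at `AtC6 i` (0x114668)            `C6` allocates `codewords` (dense, 0x1148ab) / `codeword_lengths` (sparse, 0x1148ee);
                                                       `C8` allocates AND fills `sorted_codewords`, `sorted_values` (0x1149ff, 0x114a42)
      Am   the arena at `AtC12 i` (0x114db9)           `C12` allocates `multiplicands` of a type-1 book (0x114e33 / 0x114eaf), filled by the
                                                       loop of `C13`; `C14` allocates AND fills the type-2 table (0x1150c5)

      finished things                over the snapshot's `Blk`:  CM1 – CM3 over `A2.Blk`, the codebooks block `Since A2 A3`, the tables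
                                     of the books `< i` over `Since A3 Ai`                                                 (`BookTrans`)
      the tables of book `i`         over `Since Ai A.1`; where a younger table is filled while an older one is read:
                                     `lengths` `Since Ai Aw` / `codewords` `Since Aw A.1` (`Built`), K1 – K5 over `Since Ai Am` /
                                     `multiplicands` `Since Am A.1` (`InC13`)
  THE PAYOFF (proved below): `BookTrans.store_young` (a store into ANY block allocated since `Ai` keeps the record), `.store_book`
  (a store into the struct `cb(i)`), `Built.store_codewords` / `.apartDense`, `Built.store_later` (the tables `C8` allocates),
  `InC13.store_mu`, `K15.store_book` — each was unprovable from the assertions over `A.1.Blk`. -/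

/-- **GLB(i) WITH THE AGES OF ITS BLOCKS**: the record `OwnUpTo i` (CM1 – CM3, CB0 in its non-NULL form, K1 – K6 of the books below
`i`) where the comment blocks are blocks of the snapshot `A2` (the arena at SD.2), the codebooks block was allocated between `A2`
and `A3`, and the tables of the finished books between `A3` and `Ai` (the arena at the head of iteration `i`). `A` is the current
arena. `BookTrans.upTo`: it implies `OwnUpTo i A.Blk`. -/
structure BookTrans (A2 A3 Ai A : Arena) (mem : Mem) (f i : Nat) : Prop where
  ext2 : A2.Extends A3
  ext3 : A3.Extends Ai
  exti : Ai.Extends A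
  /-- the counter is at most `codebook_count` -/
  n_le : (i : Int) ≤ stb_vorbis.codebook_count mem f
  /-- CM1 – CM3: vendor, the table of comment pointers, every comment — blocks of `A2` -/
  comment : CommentsOK A2.Blk mem f
  /-- F1: `1 ≤ codebook_count ≤ 256` -/
  F1 : 1 ≤ stb_vorbis.codebook_count mem f ∧ stb_vorbis.codebook_count mem f ≤ 256
  /-- F2: the codebooks block: allocated since `A2`, a block of `A3` -/
  F2 : Since A2 A3 ⟨stb_vorbis.codebooks mem f, Off.sizeof.Codebook * (stb_vorbis.codebook_count mem f).toNat⟩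
  /-- `codebooks ≠ NULL` -/
  nonnull : stb_vorbis.codebooks mem f ≠ 0
  /-- K1 – K6 of the finished books; their tables allocated since `A3`, blocks of `Ai` -/
  books : ∀ j : Nat, j < i → CodebookOK (Since A3 Ai) mem (stb_vorbis.codebooks_at mem f j)

namespace BookTrans
variable {A2 A3 Ai A : Arena} {mem mem' : Mem} {f i : Nat}

/-- A block of the snapshot `A2` is a block of the head-of-iteration snapshot. -/
theorem up2 (h : BookTrans A2 A3 Ai A mem f i) {B : Block} (hB : A2.Blk B) : Ai.Blk B :=
  (hB.mono h.ext2).mono h.ext3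

/-- F1 ∧ F2 over the blocks of the head-of-iteration snapshot: the codebooks block is one of them. -/
theorem cbOK (h : BookTrans A2 A3 Ai A mem f i) : CodebooksOK Ai.Blk mem f :=
  ⟨h.F1, h.F2.1.mono h.ext3⟩

/-- **The record over the arena's block predicate** (S4's `OwnUpTo`, from which `Real.SD4`'s instance over `g.Blk A` follows). -/
theorem upTo (h : BookTrans A2 A3 Ai A mem f i) : OwnUpTo i A.Blk mem f := by
  refine ⟨?_, ?_⟩
  · exact
      { comment := fun _ => CommentsOK.reblk h.comment (fun B _ hB => (h.up2 hB).mono h.exti)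
        cb0 := fun _ => Or.inr ⟨h.F1, (h.F2.1.mono h.ext3).mono h.exti⟩
        nonnull := fun _ => h.nonnull
        books := fun h5 => absurd h5 (by omega)
        floor := fun h6 => absurd h6 (by omega)
        residue := fun h7 => absurd h7 (by omega)
        mapping := fun h8 => absurd h8 (by omega) }
  · intro j hj
    exact CodebookOK.reblk (h.books j hj) (fun B _ hB => hB.1.mono h.exti)

/-- **Nothing finished yet** (the exit of segment `.9`): CM1 – CM3 over the blocks of `A2`, the codebooks block allocated since. -/
theorem zero (hext : A2.Extends A3) (hcm : CommentsOK A2.Blk mem f)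
    (h1 : 1 ≤ stb_vorbis.codebook_count mem f ∧ stb_vorbis.codebook_count mem f ≤ 256)
    (h2 : Since A2 A3 ⟨stb_vorbis.codebooks mem f, Off.sizeof.Codebook * (stb_vorbis.codebook_count mem f).toNat⟩)
    (hne : stb_vorbis.codebooks mem f ≠ 0) : BookTrans A2 A3 A3 A3 mem f 0 :=
  { ext2 := hext
    ext3 := Arena.Extends.refl _
    exti := Arena.Extends.refl _
    n_le := by omega
    comment := hcm
    F1 := h1
    F2 := h2
    nonnull := hne
    books := fun j hj => absurd hj (Nat.not_lt_zero j) }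

/-- **The arena grew** (an allocation inside the iteration): the snapshots stay. -/
theorem grow {A' : Arena} (h : BookTrans A2 A3 Ai A mem f i) (he : A.Extends A') : BookTrans A2 A3 Ai A' mem f i :=
  { h with exti := h.exti.trans he }

/-- **One more book** (the end of iteration `i`): its tables were allocated since `Ai`; the new head-of-iteration snapshot is the
current arena. -/
theorem succ (h : BookTrans A2 A3 Ai A mem f i) (hlt : (i : Int) < stb_vorbis.codebook_count mem f)
    (hnew : CodebookOK (Since Ai A) mem (stb_vorbis.codebooks_at mem f i)) : BookTrans A2 A3 A A mem f (i + 1) :=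
  { ext2 := h.ext2
    ext3 := h.ext3.trans h.exti
    exti := Arena.Extends.refl _
    n_le := by omega
    comment := h.comment
    F1 := h.F1
    F2 := h.F2
    nonnull := h.nonnull
    books := by
      intro j hj
      by_cases e : j = i
      · rw [e]
        exact CodebookOK.reblk hnew (fun B _ hB => hB.older h.ext3)
      · exact CodebookOK.reblk (h.books j (by omega)) (fun B _ hB => hB.mono h.exti) }

/-- The windows of `*f` the record reads: `vendor` … `comment_list`; `codebook_count`, `codebooks`. -/
def wins : Wins := [(24, 48), (160, 176)]

/-- **FRAME of the record, block by block**: the windows of `*f` read the same; the table of comment pointers, the struct of every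
finished book and its `sorted_values` block are kept. (The struct `cb(i)` of the book under construction and everything younger
than `Ai` may change.) -/
theorem frame (h : BookTrans A2 A3 Ai A mem f i) (he : ObjEq wins mem f mem' f)
    (hcm : ∀ B, CommentsOK.Reads mem f B → B.Kept mem mem')
    (hcb : ∀ j : Nat, j < i → (Codebook.block (stb_vorbis.codebooks_at mem f j)).Kept mem mem')
    (hsv : ∀ j : Nat, j < i → 1 ≤ Codebook.sorted_entries mem (stb_vorbis.codebooks_at mem f j) →
      (Codebook.svBlock mem (stb_vorbis.codebooks_at mem f j)).Kept mem mem') : BookTrans A2 A3 Ai A mem' f i := by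
  have m1 : ((24, 48) : Nat × Nat) ∈ wins := List.mem_cons_self
  have m2 : ((160, 176) : Nat × Nat) ∈ wins := List.mem_cons_of_mem _ List.mem_cons_self
  have ecnt : stb_vorbis.codebook_count mem' f = stb_vorbis.codebook_count mem f := by
    simp only [vacc, voff]
    exact he.i32 160 ⟨(160, 176), m2, by simp only []; omega, by simp only []; omega⟩
  have ecbs : stb_vorbis.codebooks mem' f = stb_vorbis.codebooks mem f := by
    simp only [vacc, voff]
    exact he.u64 168 ⟨(160, 176), m2, by simp only []; omega, by simp only []; omega⟩
  have eat : ∀ j, stb_vorbis.codebooks_at mem' f j = stb_vorbis.codebooks_at mem f j := by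
    intro j
    simp only [stb_vorbis.codebooks_at]
    rw [ecbs]
  refine
    { ext2 := h.ext2
      ext3 := h.ext3
      exti := h.exti
      n_le := ?_
      comment := ?_
      F1 := ?_
      F2 := ?_
      nonnull := ?_
      books := ?_ }
  · rw [ecnt]
    exact h.n_le
  · refine h.comment.transfer (he.sub ?_) hcm (fun _ _ hb => hb)
    intro w hw
    simp only [CommentsOK.wins, List.mem_cons, List.mem_nil_iff, or_false] at hw
    subst hw
    exact ⟨(24, 48), m1, Nat.le_refl _, Nat.le_refl _⟩
  · rw [ecnt]
    exact h.F1
  · rw [ecnt, ecbs]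
    exact h.F2
  · rw [ecbs]
    exact h.nonnull
  · intro j hj
    rw [eat j]
    exact (h.books j hj).frame (hcb j hj) (hsv j hj)

/-- **FRAME of the record, coarse**: every block of the head-of-iteration snapshot `Ai` is kept (a store or a callee's footprint
inside a block allocated since `Ai`, a temp block, the stack). -/
theorem frame_old (h : BookTrans A2 A3 Ai A mem f i) (he : ObjEq wins mem f mem' f) (hk : AllKept Ai.Blk mem mem') :
    BookTrans A2 A3 Ai A mem' f i := by
  apply h.frame he
  · intro B hR
    exact hk B (h.up2 (h.comment.reads_blk hR))
  · intro j hj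
    have hlt : (j : Int) < stb_vorbis.codebook_count mem f := by
      have := h.n_le
      omega
    exact h.cbOK.cb_kept (hk _ h.cbOK.F2) j hlt
  · intro j hj hse
    exact hk _ ((h.books j hj).K4.sv hse).1

/-- **THE PAYOFF, 1: A STORE INTO A BLOCK ALLOCATED SINCE THE HEAD OF THE ITERATION KEEPS THE RECORD** — the `lengths` array of a dense
book, `codewords`, `codeword_lengths`, `sorted_codewords`, `sorted_values`, `multiplicands` of book `i`: `C` is any block of
`Since Ai A`, the `k` bytes at `b` lie inside it. `ha`: the arena layer of the moment; `hout`, `hf`: `*f` (a stack object) lies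
outside the arena's buffer (`HandOK.objOut`) and does not wrap. -/
theorem store_young {others : List Obj} (h : BookTrans A2 A3 Ai A mem f i) (ha : ArenaOK A others mem f)
    (hout : f + Off.sizeof.stb_vorbis ≤ A.B ∨ A.B + A.L ≤ f) (hf : f + Off.sizeof.stb_vorbis ≤ 2 ^ 64) {C : Block}
    (hC : Since Ai A C) {b k : Nat} (v : Nat) (hin : C.contains b k) :
    BookTrans A2 A3 Ai A (mem.writeLE (addr b) k v) f i := by
  apply h.frame_old
  · apply ha.objEq_of_store_blk hC.1 v hin hout hf
    intro w hw
    simp only [wins, List.mem_cons, List.mem_nil_iff, or_false] at hw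
    rcases hw with rfl | rfl
    · simp only [voff]
      omega
    · simp only [voff]
      omega
  · exact ha.allKept_of_store_since h.exti hC v hin

/-- The same for a callee's footprint (the walker's `SameExcept` of a batch of stores) inside the young block: memset, memcpy,
compute_codewords, compute_sorted_huffman writing ONE table. `he`: the windows of `*f` read the same (`ObjEq.of_sameExcept`). -/
theorem footprint_young {others : List Obj} (h : BookTrans A2 A3 Ai A mem f i) (ha : ArenaOK A others mem f)
    (he : ObjEq wins mem f mem' f) {C : Block} (hC : Since Ai A C) {ws : List Span} (hs : Mem.SameExcept ws mem mem')
    (hin : ∀ w, w ∈ ws → C.base ≤ w.lo ∧ w.hi ≤ C.base + C.size) : BookTrans A2 A3 Ai A mem' f i :=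
  h.frame_old he (ha.allKept_of_since h.exti hC hs hin)

/-- **THE PAYOFF, 2: A STORE INTO THE STRUCT `cb(i)` OF THE BOOK UNDER CONSTRUCTION KEEPS THE RECORD**: the struct lies in the
codebooks block (allocated between `A2` and `A3`), so the store keeps the table of comment pointers (a block of `A2`), the
structs of the other books (`cb_disjoint`) and the `sorted_values` block of every finished book (allocated since `A3`). -/
theorem store_book {others : List Obj} (h : BookTrans A2 A3 Ai A mem f i) (ha : ArenaOK A others mem f)
    (hout : f + Off.sizeof.stb_vorbis ≤ A.B ∨ A.B + A.L ≤ f) (hf : f + Off.sizeof.stb_vorbis ≤ 2 ^ 64)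
    (hlt : (i : Int) < stb_vorbis.codebook_count mem f) {b k : Nat} (v : Nat)
    (hin : (Codebook.block (stb_vorbis.codebooks_at mem f i)).contains b k) :
    BookTrans A2 A3 Ai A (mem.writeLE (addr b) k v) f i := by
  have h3 : A3.Extends A := h.ext3.trans h.exti
  have h2 : A2.Extends A := h.ext2.trans h3
  have hcbA : A.Blk (codebooksBlock mem f) := (h.F2.1.mono h.ext3).mono h.exti
  have hci := h.cbOK.cb_in i hlt
  -- the store lies inside the codebooks block
  have hinCb : (codebooksBlock mem f).contains b k := by
    simp only [vblock] at hci hin ⊢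
    omega
  have hwrapCb := ha.blkOK.no_wrap hcbA
  apply h.frame
  · apply ha.objEq_of_store_blk hcbA v hinCb hout hf
    intro w hw
    simp only [wins, List.mem_cons, List.mem_nil_iff, or_false] at hw
    rcases hw with rfl | rfl
    · simp only [voff]
      omega
    · simp only [voff]
      omega
  · intro B hR
    have hB : A2.Blk B := h.comment.reads_blk hR
    exact ha.kept_of_store_since h2 hB (h.F2.mono h3) v hinCb
  · intro j hj
    have hlj : (j : Int) < stb_vorbis.codebook_count mem f := by omega
    have hcj := h.cbOK.cb_in j hlj
    have hd := CodebooksOK.cb_disjoint mem f j i (by omega)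
    apply Block.Kept.of_writeLE mem b k v hd hin
    · simp only [vblock] at hci hwrapCb ⊢
      omega
    · simp only [vblock] at hcj hwrapCb ⊢
      omega
  · intro j hj hse
    have hS : Since A3 A (Codebook.svBlock mem (stb_vorbis.codebooks_at mem f j)) := ((h.books j hj).K4.sv hse).mono h.exti
    exact ha.kept_of_store_old h3 hS h.F2.1 v hinCb

end BookTrans

/-! ### Part C: the codebook loop -/

/-- **`AtC1`, 0x11428b** (exit of `.9` = HANDOVER of part 1, entry of `C1`; line 3746, after `memset(f->codebooks, 0, …)` returned):
CORE with setups = vendor, comment_list, strings, codebooks ; HD1 – HD3 ; CM1 – CM3 ; CB0 second disjunct (`1 ≤ codebook_count ≤ 256`,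
`codebooks = Block(2120·count)`) with ALL its bytes 0 = ZF(0) ; Z10 ; ONE20 ; Z24 ; everything from `floor_count` on = H0 ;
`temps = []` — point `SD4 0` (= SD.3). rbp = f ; dword [R+18H], [R+30H] and r12 r14 r15 rbx dead (r13 = codebooks, dead).
THE AGES (`ages`): for a ghost snapshot `A2` (the arena at `At9`, before the `setup_malloc` of segment `.9`) CM1 – CM3 are over the
blocks of `A2` and the codebooks block was allocated since; `A3` = the current arena. `BodyC1.own`: the record `Own 3 A.1.Blk`. -/
structure BodyC1 (u₀ : State) (g : Ghost) (A : Arena × List Obj) (v : State) : Prop where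
  frame : Frame u₀ g pc_C1 A v
  hand : g.Hand A
  rbp : v.reg .rbp = addr g.f
  sd : Real.SD4 g.len 0 A (g.Blk A) (g.Live A) v.mem g.f g.R
  /-- CM1 – CM3 over the blocks of the snapshot `A2`, the codebooks block allocated since -/
  ages : ∃ A2 : Arena, BookTrans A2 A.1 A.1 A.1 v.mem g.f 0

/-- CM1 – CM3, CB0 over the arena's blocks. -/
theorem BodyC1.own {u₀ : State} {g : Ghost} {A : Arena × List Obj} {v : State} (h : BodyC1 u₀ g A v) :
    Own 3 A.1.Blk v.mem g.f := by
  obtain ⟨A2, ha⟩ := h.ages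
  exact ha.upTo.own

/-- `AtC1`: `BodyC1` for some ghost arena. -/
def AtC1 (u₀ : State) (g : Ghost) (v : State) : Prop := ∃ A, BodyC1 u₀ g A v

/-- **`AtC2 i`, 0x114298** (entry of `C2` = HEAD of `for (i=0; i < f->codebook_count; ++i)`; exit of `C1` with i = 0, of `C10` with
i + 1): FRM ∧ dword [R+30H] = i ∧ 0 ≤ i ≤ count ∧ GLB(i) ∧ ZF(i) ∧ temps = [] (T = L) — point `SD4 i` (`done.upto` is `i ≤ count`).
qword [R+18H] = f. NO register is live (f is reloaded from [R+18H]). Measure of the loop: count − i.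
THE AGES (`ages`): GLB(i) with the ghost snapshots `A2`, `A3` (`BookTrans`); the head-of-iteration snapshot `Ai` IS the current
arena. `BodyC2.own`: the record `OwnUpTo i A.1.Blk`. -/
structure BodyC2 (u₀ : State) (g : Ghost) (i : Nat) (A : Arena × List Obj) (v : State) : Prop where
  frame : Frame u₀ g pc_C2 A v
  hand : g.Hand A
  /-- the spill of f (written 0x114293) -/
  slot_f : v.mem.u64 (g.R + 0x18) = g.f
  /-- i of line 3746 -/
  slot_i : v.mem.u32 (g.R + 0x30) = i
  sd : Real.SD4 g.len i A (g.Blk A) (g.Live A) v.mem g.f g.R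
  /-- CM1 – CM3, CB0, the books below `i`, with the ages of their blocks -/
  ages : ∃ A2 A3 : Arena, BookTrans A2 A3 A.1 A.1 v.mem g.f i

/-- CM1 – CM3, CB0, the books below `i` over the arena's blocks. -/
theorem BodyC2.own {u₀ : State} {g : Ghost} {i : Nat} {A : Arena × List Obj} {v : State} (h : BodyC2 u₀ g i A v) :
    OwnUpTo i A.1.Blk v.mem g.f := by
  obtain ⟨A2, A3, ha⟩ := h.ages
  exact ha.upTo

/-- `AtC2 i`: `BodyC2` for some ghost arena. -/
def AtC2 (u₀ : State) (g : Ghost) (i : Nat) (v : State) : Prop := ∃ A, BodyC2 u₀ g i A v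

/-- **`AtC10 i`, 0x114788** (`++i`: `add dword [rsp+30H], 1 ; jmp 0x114298`; exit of `C9` when lookup_type = 0, of `C15`): FRM ∧
dword [R+30H] = i ∧ 0 ≤ i < count ∧ GLB(i) ∧ CodebookOK cb(i) ∧ ZF(i+1) ∧ temps = [] — that is `SD4 (i + 1)` with the slot still
holding `i` (`i + 1 ≤ count ≤ 256`: the increment does not overflow). THE AGES: book `i` is finished, so the current arena is the
head-of-iteration snapshot of `i + 1` (`BookTrans.succ`). -/
structure BodyC10 (u₀ : State) (g : Ghost) (i : Nat) (A : Arena × List Obj) (v : State) : Prop where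
  frame : Frame u₀ g pc_C10 A v
  hand : g.Hand A
  slot_f : v.mem.u64 (g.R + 0x18) = g.f
  slot_i : v.mem.u32 (g.R + 0x30) = i
  sd : Real.SD4 g.len (i + 1) A (g.Blk A) (g.Live A) v.mem g.f g.R
  ages : ∃ A2 A3 : Arena, BookTrans A2 A3 A.1 A.1 v.mem g.f (i + 1)

/-- CM1 – CM3, CB0, the books up to `i` over the arena's blocks. -/
theorem BodyC10.own {u₀ : State} {g : Ghost} {i : Nat} {A : Arena × List Obj} {v : State} (h : BodyC10 u₀ g i A v) :
    OwnUpTo (i + 1) A.1.Blk v.mem g.f := by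
  obtain ⟨A2, A3, ha⟩ := h.ages
  exact ha.upTo

/-- `AtC10 i`: `BodyC10` for some ghost arena. -/
def AtC10 (u₀ : State) (g : Ghost) (i : Nat) (v : State) : Prop := ∃ A, BodyC10 u₀ g i A v

/-- **`AtC16`, 0x1151bf** (exit of `C2` when `count ≤ i`, entry of `C16`; line 3956): FRM ∧ GLB(count) (∀ i′ < count:
CodebookOK cb(i′)) ∧ temps = [] — `SD4 i` with `i = codebook_count` (so `SD4.codebooksOK` gives the codebook line of SD.5). No
register live (rbp is reloaded from [R+18H] at 0x1151bf). `BodyC16.own` + `OwnUpTo.own5`: the record `Own 5 A.1.Blk` of the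
hand-over `BodyF1`. -/
structure BodyC16 (u₀ : State) (g : Ghost) (i : Nat) (A : Arena × List Obj) (v : State) : Prop where
  frame : Frame u₀ g pc_C16 A v
  hand : g.Hand A
  slot_f : v.mem.u64 (g.R + 0x18) = g.f
  all : (i : Int) = stb_vorbis.codebook_count v.mem g.f
  sd : Real.SD4 g.len i A (g.Blk A) (g.Live A) v.mem g.f g.R
  ages : ∃ A2 A3 : Arena, BookTrans A2 A3 A.1 A.1 v.mem g.f i

/-- CM1 – CM3, CB0, every book over the arena's blocks. -/
theorem BodyC16.own {u₀ : State} {g : Ghost} {i : Nat} {A : Arena × List Obj} {v : State} (h : BodyC16 u₀ g i A v) :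
    OwnUpTo i A.1.Blk v.mem g.f := by
  obtain ⟨A2, A3, ha⟩ := h.ages
  exact ha.upTo

/-- `AtC16`: `BodyC16` for some ghost arena and `i = codebook_count`. -/
def AtC16 (u₀ : State) (g : Ghost) (v : State) : Prop := ∃ A i, BodyC16 u₀ g i A v

/-! #### Inside an iteration

THE FORM. `AtC<k> u₀ g i v := ∃ A …, BodyC<k> u₀ g i A … v` as everywhere; inside an iteration `BodyC<k> … := ∃ A2 A3 Ai [Aw | Am],
InC<k> u₀ g i A2 A3 Ai … A … v`: the ghost snapshots are existential INSIDE the body (the parameter lists of `At…`, `Body…` are those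
of the whole family), and `InC<k>` is the structure with the clauses. A worker opens an entry assertion with
`obtain ⟨A, …, A2, A3, Ai, h⟩ := hAt` and closes an exit with `⟨A', …, A2, A3, Ai, { frame := …, cur := …, … }⟩` — the SAME `A2 A3 Ai`
all through the iteration. -/

/-- The temp blocks outstanding, innermost first, by ABSOLUTE address and exact size (CONTRACTS "Ghost temps": P1 … P4): the
ghost's list of (offset, size) is this list with `B` subtracted. `TempsAre A []` is `temps = []`. -/
def TempsAre (A : Arena) (blocks : List (Nat × Nat)) : Prop :=
  A.temps = blocks.map (fun b => (b.1 - A.B, b.2)) ∧ ∀ b, b ∈ blocks → A.B ≤ b.1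

/-- A block of the list is a temp block of the ghost arena (`TBlock(p, n)` of INVARIANTS). -/
theorem TempsAre.tblock {A : Arena} {blocks : List (Nat × Nat)} (h : TempsAre A blocks) {p n : Nat} (hm : (p, n) ∈ blocks) :
    A.TBlock p n := by
  refine ⟨p - A.B, ?_, ?_⟩
  · rw [h.1]
    exact List.mem_map.mpr ⟨(p, n), hm, rfl⟩
  · have := h.2 (p, n) hm
    simp only at this
    omega

/-- No temp block outstanding. -/
theorem TempsAre.nil_iff (A : Arena) : TempsAre A [] ↔ A.temps = [] := by
  unfold TempsAre
  simp only [List.map_nil, List.not_mem_nil, false_imp_iff, implies_true, and_true]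

/-- `cb(i)`, the codebook the iteration `i` builds. -/
def Ghost.cb (g : Ghost) (mem : Mem) (i : Nat) : Nat := stb_vorbis.codebooks_at mem g.f i

/-- **CUR(i)** of CONTRACTS 113 part C: FRM ∧ GLB(i) ∧ ZF(i+1) ∧ 0 ≤ i < count ∧ dword [R+30H] = i ∧ r14 = c = cb(i).
FRM = `Frame` + qword [R+18H] = f + Z24 + Z10 (+ ONE20): `sd.frame`. GLB(i) = OB1, HD1 – HD3, CM1 – CM3, CB0 non-NULL with
`1 ≤ count ≤ 256`, ∀ i′ < i CodebookOK cb(i′), H0rest, `Bits f`, AR1 – AR7, SH1 – SH8: `sd`, `ages`, and `Frame.shadow`; CM1 – CM3 and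
the finished books are in `ages`, WITH THE AGES OF THEIR BLOCKS: `A2`, `A3`, `Ai` = the ghost snapshots of the arena at SD.2, after
the codebooks block, at the head of this iteration (`BookTrans`; `Cur.own`: the record `OwnUpTo i A.1.Blk`). What the iteration
allocates is NOT a block of `Ai`: each point states the tables of book `i` over `Since Ai A.1`.
Temp blocks may be outstanding: which ones, each point says (`TempsAre`). -/
structure Cur (g : Ghost) (i : Nat) (A2 A3 Ai : Arena) (A : Arena × List Obj) (v : State) : Prop where
  sd : SDw g.len 3 A (g.Blk A) (g.Live A) v.mem g.f g.R
  hand : g.Hand A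
  /-- CM1 – CM3, CB0, and ∀ i′ < i: CodebookOK cb(i′) — over the blocks of the SNAPSHOTS (over `g.Blk A`: by `reblk`, `Cur.done`) -/
  ages : BookTrans A2 A3 Ai A.1 v.mem g.f i
  /-- ZF(i+1): the books after this one are still all zero -/
  zf : ZF v.mem (stb_vorbis.codebooks v.mem g.f) (stb_vorbis.codebook_count v.mem g.f).toNat (i + 1)
  lt : (i : Int) < stb_vorbis.codebook_count v.mem g.f
  slot_f : v.mem.u64 (g.R + 0x18) = g.f
  slot_i : v.mem.u32 (g.R + 0x30) = i
  /-- r14 = c -/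
  r14 : v.reg .r14 = addr (g.cb v.mem i)

/-- CM1 – CM3, CB0, and the finished books over the ARENA's blocks (S4's record). -/
theorem Cur.own {g : Ghost} {i : Nat} {A2 A3 Ai : Arena} {A : Arena × List Obj} {v : State} (h : Cur g i A2 A3 Ai A v) :
    OwnUpTo i A.1.Blk v.mem g.f :=
  h.ages.upTo

/-- "c fresh at {LT, LV, MU}": the three fields still hold the 0 of ZF. -/
structure Fresh3 (mem : Mem) (c : Nat) : Prop where
  lookup_type : Codebook.lookup_type mem c = 0
  lookup_values : Codebook.lookup_values mem c = 0
  multiplicands : Codebook.multiplicands mem c = 0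

/-- "c fresh at {LT, LV, MU, SC, SV}". -/
structure Fresh5 (mem : Mem) (c : Nat) : Prop extends Fresh3 mem c where
  sorted_codewords : Codebook.sorted_codewords mem c = 0
  sorted_values : Codebook.sorted_values mem c = 0

/-- "c fresh at {LT, LV, MU, CW, SC, SV, SE}". -/
structure Fresh7 (mem : Mem) (c : Nat) : Prop extends Fresh5 mem c where
  codewords : Codebook.codewords mem c = 0
  sorted_entries : Codebook.sorted_entries mem c = 0

/-- **Where the `lengths` array is** (C2 → C6): a sparse book (`SP = 1`) has it in the temp block P1 = (lengths, E), the only temp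
block, and `codeword_lengths` is still NULL; a dense book (`SP = 0`) has it in its final setup block, `lengths = codeword_lengths`,
and no temp block is outstanding. `P` is the block predicate of the dense block: `Since Ai A.1` — it was allocated in THIS
iteration (segment `C2`, or the conversion of `C5`), so it is no block of the head-of-iteration snapshot. -/
structure LengthsAt (P : Block → Prop) (A : Arena × List Obj) (mem : Mem) (c lengths : Nat) : Prop where
  sparse_01 : Codebook.sparse mem c = 0 ∨ Codebook.sparse mem c = 1
  sparse_temp : Codebook.sparse mem c = 1 → TempsAre A.1 [(lengths, (Codebook.entries mem c).toNat)]
  sparse_null : Codebook.sparse mem c = 1 → Codebook.codeword_lengths mem c = 0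
  dense_block : Codebook.sparse mem c = 0 → P ⟨lengths, (Codebook.entries mem c).toNat⟩
  dense_eq : Codebook.sparse mem c = 0 → lengths = Codebook.codeword_lengths mem c
  dense_temps : Codebook.sparse mem c = 0 → A.1.temps = []

/-- **`AtC3 i`, 0x1144ee** (exit of `C2` when ordered ≠ 0, entry of `C3`; line 3774): CUR(i) ∧ K1 ∧ SP = 0 ∧ rbx = lengths = CL ∧
Block(rbx, E) ∧ temps = [] ∧ c fresh at {LT, LV, MU, CW, SC, SV, SE}. (SP = 0 was read from byte [R+10H]: Z10.) The block of
`lengths` was allocated in `C2`: since `Ai`. -/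
structure InC3 (u₀ : State) (g : Ghost) (i : Nat) (A2 A3 Ai : Arena) (A : Arena × List Obj) (v : State) : Prop where
  frame : Frame u₀ g pc_C3 A v
  cur : Cur g i A2 A3 Ai A v
  k1 : Codebook.K1 v.mem (g.cb v.mem i)
  sparse0 : Codebook.sparse v.mem (g.cb v.mem i) = 0
  rbx : v.reg .rbx = addr (Codebook.codeword_lengths v.mem (g.cb v.mem i))
  lengths : Since Ai A.1 ⟨Codebook.codeword_lengths v.mem (g.cb v.mem i), (Codebook.entries v.mem (g.cb v.mem i)).toNat⟩
  noTemps : A.1.temps = []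
  fresh : Fresh7 v.mem (g.cb v.mem i)

/-- `BodyC3`: `InC3` for some ghost snapshots. -/
def BodyC3 (u₀ : State) (g : Ghost) (i : Nat) (A : Arena × List Obj) (v : State) : Prop :=
  ∃ A2 A3 Ai, InC3 u₀ g i A2 A3 Ai A v

/-- `AtC3 i`: `BodyC3` for some ghost arena. -/
def AtC3 (u₀ : State) (g : Ghost) (i : Nat) (v : State) : Prop := ∃ A, BodyC3 u₀ g i A v

/-- **`AtC4 i`, 0x1147c3** (exit of `C2` when ordered = 0, entry of `C4` = head of loop 3786 `for (j=0; j < c->entries; ++j)`):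
CUR(i) ∧ K1 ∧ SP ∈ {0,1} ∧ r12d = j ∧ 0 ≤ j ≤ E ∧ ebp = total = #{j′ < j : lengths[j′] ≠ 255} ∧ L(j) ∧ rbx = lengths ∧ (SP = 1:
TBlock(rbx, E), temps = [P1], CL = 0 | SP = 0: Block(rbx, E) allocated since `Ai`, rbx = CL, temps = []) ∧ c fresh at
{LT, LV, MU, CW, SC, SV, SE}. First arrival: j = total = 0. -/
structure InC4 (u₀ : State) (g : Ghost) (i : Nat) (A2 A3 Ai : Arena) (A : Arena × List Obj) (lengths j : Nat) (v : State) :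
    Prop where
  frame : Frame u₀ g pc_C4 A v
  cur : Cur g i A2 A3 Ai A v
  k1 : Codebook.K1 v.mem (g.cb v.mem i)
  r12 : v.reg .r12 = addr j
  j_le : (j : Int) ≤ Codebook.entries v.mem (g.cb v.mem i)
  /-- total of line 3785: the used entries so far -/
  rbp : v.reg .rbp = addr (usedCount v.mem lengths j)
  rbx : v.reg .rbx = addr lengths
  /-- L(j) -/
  lenL : LenL v.mem lengths j
  place : LengthsAt (Since Ai A.1) A v.mem (g.cb v.mem i) lengths
  fresh : Fresh7 v.mem (g.cb v.mem i)

/-- `BodyC4`: `InC4` for some ghost snapshots. -/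
def BodyC4 (u₀ : State) (g : Ghost) (i : Nat) (A : Arena × List Obj) (lengths j : Nat) (v : State) : Prop :=
  ∃ A2 A3 Ai, InC4 u₀ g i A2 A3 Ai A lengths j v

/-- `AtC4 i`: `BodyC4` for some ghost arena, `lengths` array and counter `j`. -/
def AtC4 (u₀ : State) (g : Ghost) (i : Nat) (v : State) : Prop := ∃ A lengths j, BodyC4 u₀ g i A lengths j v

/-- **`AtC5 i`, 0x114594** (exit of `C3` and of `C4`, entry of `C5`; line 3799): CUR(i) ∧ K1 ∧ SP ∈ {0,1} ∧ rbx = lengths ∧ L(E) ∧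
ebp = total ∧ 0 ≤ total ≤ E ∧ (SP = 1: TBlock(rbx, E), temps = [P1], CL = 0, total = #{j < E : lengths[j] ≠ 255} | SP = 0:
Block(rbx, E) allocated since `Ai`, rbx = CL, temps = [], total meaningless (0 on the ordered path)) ∧ c fresh at
{LT, LV, MU, CW, SC, SV, SE}. From C3 every byte of lengths[0..E) is in [1, 31] (⇒ L(E)). -/
structure InC5 (u₀ : State) (g : Ghost) (i : Nat) (A2 A3 Ai : Arena) (A : Arena × List Obj) (lengths total : Nat)
    (v : State) : Prop where
  frame : Frame u₀ g pc_C5 A v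
  cur : Cur g i A2 A3 Ai A v
  k1 : Codebook.K1 v.mem (g.cb v.mem i)
  rbx : v.reg .rbx = addr lengths
  rbp : v.reg .rbp = addr total
  total_le : (total : Int) ≤ Codebook.entries v.mem (g.cb v.mem i)
  /-- L(E) -/
  lenL : LenL v.mem lengths (Codebook.entries v.mem (g.cb v.mem i)).toNat
  place : LengthsAt (Since Ai A.1) A v.mem (g.cb v.mem i) lengths
  /-- a sparse book: `total` is the number of used entries -/
  sparse_total : Codebook.sparse v.mem (g.cb v.mem i) = 1 →
    total = usedCount v.mem lengths (Codebook.entries v.mem (g.cb v.mem i)).toNat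
  fresh : Fresh7 v.mem (g.cb v.mem i)

/-- `BodyC5`: `InC5` for some ghost snapshots. -/
def BodyC5 (u₀ : State) (g : Ghost) (i : Nat) (A : Arena × List Obj) (lengths total : Nat) (v : State) : Prop :=
  ∃ A2 A3 Ai, InC5 u₀ g i A2 A3 Ai A lengths total v

/-- `AtC5 i`: `BodyC5` for some ghost arena, `lengths` array and `total`. -/
def AtC5 (u₀ : State) (g : Ghost) (i : Nat) (v : State) : Prop := ∃ A lengths total, BodyC5 u₀ g i A lengths total v

/-- **`AtC6 i`, 0x114668** (exit of `C5`, entry of `C6`; line 3824): CUR(i) ∧ K1 ∧ r13b = SP ∈ {0,1} ∧ ebp = sorted_count ∧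
rbx = lengths ∧ L(E) ∧ (SP = 1 [not converted]: TBlock(rbx, E) = P1, temps = [P1], CL = 0, ebp = total = #{j < E : lengths[j] ≠ 255},
4·total < E | SP = 0: Block(rbx, E) allocated since `Ai` (in `C2`, or by the conversion of `C5`), rbx = CL, temps = [],
ebp = #{j < E : 11 ≤ lengths[j] ≤ 254}, 0 ≤ ebp ≤ E) ∧ c fresh at {LT, LV, MU, CW, SC, SV, SE}. SP is final (not written again).
r13 is the zero-extended byte (`movzx r13d, byte [r14+1BH]`). The arena of THIS point is the snapshot `Aw` of `AtC7`, `AtC8`. -/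
structure InC6 (u₀ : State) (g : Ghost) (i : Nat) (A2 A3 Ai : Arena) (A : Arena × List Obj) (lengths count : Nat)
    (v : State) : Prop where
  frame : Frame u₀ g pc_C6 A v
  cur : Cur g i A2 A3 Ai A v
  k1 : Codebook.K1 v.mem (g.cb v.mem i)
  r13 : v.reg .r13 = addr (Codebook.sparse v.mem (g.cb v.mem i))
  rbx : v.reg .rbx = addr lengths
  /-- sorted_count -/
  rbp : v.reg .rbp = addr count
  lenL : LenL v.mem lengths (Codebook.entries v.mem (g.cb v.mem i)).toNat
  place : LengthsAt (Since Ai A.1) A v.mem (g.cb v.mem i) lengths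
  sparse_count : Codebook.sparse v.mem (g.cb v.mem i) = 1 →
    count = usedCount v.mem lengths (Codebook.entries v.mem (g.cb v.mem i)).toNat ∧
      4 * (count : Int) < Codebook.entries v.mem (g.cb v.mem i)
  dense_count : Codebook.sparse v.mem (g.cb v.mem i) = 0 →
    count = longCount v.mem lengths (Codebook.entries v.mem (g.cb v.mem i)).toNat
  fresh : Fresh7 v.mem (g.cb v.mem i)

/-- `BodyC6`: `InC6` for some ghost snapshots. -/
def BodyC6 (u₀ : State) (g : Ghost) (i : Nat) (A : Arena × List Obj) (lengths count : Nat) (v : State) : Prop :=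
  ∃ A2 A3 Ai, InC6 u₀ g i A2 A3 Ai A lengths count v

/-- `AtC6 i`: `BodyC6` for some ghost arena, `lengths` array and `sorted_count`. -/
def AtC6 (u₀ : State) (g : Ghost) (i : Nat) (v : State) : Prop := ∃ A lengths count, BodyC6 u₀ g i A lengths count v

/-- **The state of the book between the allocations of C6 and the frees of C8** (the 0x1146d2 exit assertion of C6): rbx = lengths ∧
r12 = values ∧ L(E) ∧ K1 ∧ K2 ∧ (SP = 0: r12 = 0, K3n [Block(CL = rbx, E), Block(CW, 4·E)], temps = [], CNT′ | SP = 1: SE ≥ 1,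
4·SE < E [both in K2], Block(CL, SE), TBlock(CW, 4·SE) = P2, TBlock(r12, 4·SE) = P3, TBlock(rbx, E) = P1, temps = [P3, P2, P1], CNT)
∧ c fresh at {LT, LV, MU, SC, SV}. THE AGES: `Aw` = the arena at `AtC6` (before the allocations of segment `C6`): the `lengths` block
of a dense book is OLDER than it (`Since Ai Aw`), `codewords` (dense) / `codeword_lengths` (sparse) were allocated since — so
compute_codewords' stores into `codewords` keep `lengths` (`Built.store_codewords`, `Built.apartDense`). -/
structure Built (g : Ghost) (i : Nat) (A2 A3 Ai Aw : Arena) (A : Arena × List Obj) (lengths values : Nat) (v : State) :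
    Prop where
  cur : Cur g i A2 A3 Ai A v
  /-- `Aw` lies between the head of the iteration and now -/
  extw : Ai.Extends Aw
  extw' : Aw.Extends A.1
  k1 : Codebook.K1 v.mem (g.cb v.mem i)
  k2 : Codebook.K2 v.mem (g.cb v.mem i)
  rbx : v.reg .rbx = addr lengths
  r12 : v.reg .r12 = addr values
  lenL : LenL v.mem lengths (Codebook.entries v.mem (g.cb v.mem i)).toNat
  dense_values : Codebook.sparse v.mem (g.cb v.mem i) = 0 → values = 0
  /-- K3n, `codeword_lengths`: allocated between `Ai` and `Aw` -/
  dense_lengths : Codebook.sparse v.mem (g.cb v.mem i) = 0 →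
    Since Ai Aw ⟨Codebook.codeword_lengths v.mem (g.cb v.mem i), (Codebook.entries v.mem (g.cb v.mem i)).toNat⟩
  /-- K3n, `codewords`: allocated since `Aw` -/
  dense_codewords : Codebook.sparse v.mem (g.cb v.mem i) = 0 →
    Since Aw A.1 ⟨Codebook.codewords v.mem (g.cb v.mem i), 4 * (Codebook.entries v.mem (g.cb v.mem i)).toNat⟩
  dense_eq : Codebook.sparse v.mem (g.cb v.mem i) = 0 → lengths = Codebook.codeword_lengths v.mem (g.cb v.mem i)
  dense_temps : Codebook.sparse v.mem (g.cb v.mem i) = 0 → A.1.temps = []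
  dense_cnt : Codebook.sparse v.mem (g.cb v.mem i) = 0 → CNT' v.mem lengths (g.cb v.mem i)
  /-- the final `codeword_lengths` block of a sparse book: allocated since `Aw` -/
  sparse_lengths : Codebook.sparse v.mem (g.cb v.mem i) = 1 →
    Since Aw A.1 ⟨Codebook.codeword_lengths v.mem (g.cb v.mem i), (Codebook.sorted_entries v.mem (g.cb v.mem i)).toNat⟩
  /-- temps = [P3, P2, P1] -/
  sparse_temps : Codebook.sparse v.mem (g.cb v.mem i) = 1 →
    TempsAre A.1
      [(values, 4 * (Codebook.sorted_entries v.mem (g.cb v.mem i)).toNat),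
       (Codebook.codewords v.mem (g.cb v.mem i), 4 * (Codebook.sorted_entries v.mem (g.cb v.mem i)).toNat),
       (lengths, (Codebook.entries v.mem (g.cb v.mem i)).toNat)]
  sparse_cnt : Codebook.sparse v.mem (g.cb v.mem i) = 1 → CNT v.mem lengths (g.cb v.mem i)
  fresh : Fresh5 v.mem (g.cb v.mem i)

/-- **`AtC7 i`, 0x1146d2** (exit of `C6`, entry of `C7`; line 3846, before `compute_codewords(c, lengths, c->entries, values)`):
`Built`. -/
structure InC7 (u₀ : State) (g : Ghost) (i : Nat) (A2 A3 Ai Aw : Arena) (A : Arena × List Obj) (lengths values : Nat)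
    (v : State) : Prop where
  frame : Frame u₀ g pc_C7 A v
  built : Built g i A2 A3 Ai Aw A lengths values v

/-- `BodyC7`: `InC7` for some ghost snapshots. -/
def BodyC7 (u₀ : State) (g : Ghost) (i : Nat) (A : Arena × List Obj) (lengths values : Nat) (v : State) : Prop :=
  ∃ A2 A3 Ai Aw, InC7 u₀ g i A2 A3 Ai Aw A lengths values v

/-- `AtC7 i`: `BodyC7` for some ghost arena, `lengths` and `values` arrays. -/
def AtC7 (u₀ : State) (g : Ghost) (i : Nat) (v : State) : Prop := ∃ A lengths values, BodyC7 u₀ g i A lengths values v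

/-- **`AtC8 i`, 0x1146f5** (exit of `C7` when compute_codewords returned non-zero, entry of `C8`; line 3851): everything of `AtC7`
∧ (SP = 1: VAL — every `values[m]`, m < SE, is `< E`) ; the bytes of lengths[0..E) unchanged (so L(E), CNT / CNT′ still hold:
they are restated in `Built` for the new memory). -/
structure InC8 (u₀ : State) (g : Ghost) (i : Nat) (A2 A3 Ai Aw : Arena) (A : Arena × List Obj) (lengths values : Nat)
    (v : State) : Prop where
  frame : Frame u₀ g pc_C8 A v
  built : Built g i A2 A3 Ai Aw A lengths values v
  sparse_val : Codebook.sparse v.mem (g.cb v.mem i) = 1 →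
    VAL v.mem values (Codebook.sorted_entries v.mem (g.cb v.mem i)).toNat (Codebook.entries v.mem (g.cb v.mem i)).toNat

/-- `BodyC8`: `InC8` for some ghost snapshots. -/
def BodyC8 (u₀ : State) (g : Ghost) (i : Nat) (A : Arena × List Obj) (lengths values : Nat) (v : State) : Prop :=
  ∃ A2 A3 Ai Aw, InC8 u₀ g i A2 A3 Ai Aw A lengths values v

/-- `AtC8 i`: `BodyC8` for some ghost arena, `lengths` and `values` arrays. -/
def AtC8 (u₀ : State) (g : Ghost) (i : Nat) (v : State) : Prop := ∃ A lengths values, BodyC8 u₀ g i A lengths values v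

/-- **`AtC9 i`, 0x114724** (exit of `C8`, entry of `C9`; line 3871, before `compute_accelerated_huffman(c)`): CUR(i) ∧ K1 – K4 ∧ K4c ∧
temps = [] ∧ c fresh at {LT, LV, MU} (rbx, r12, rbp, r15 dead). The tables of K3, K4 were all allocated since `Ai`. -/
structure InC9 (u₀ : State) (g : Ghost) (i : Nat) (A2 A3 Ai : Arena) (A : Arena × List Obj) (v : State) : Prop where
  frame : Frame u₀ g pc_C9 A v
  cur : Cur g i A2 A3 Ai A v
  k1 : Codebook.K1 v.mem (g.cb v.mem i)
  k2 : Codebook.K2 v.mem (g.cb v.mem i)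
  k3 : Codebook.K3 (Since Ai A.1) v.mem (g.cb v.mem i)
  k4 : Codebook.K4 (Since Ai A.1) v.mem (g.cb v.mem i)
  k4c : Codebook.K4c v.mem (g.cb v.mem i)
  noTemps : A.1.temps = []
  fresh : Fresh3 v.mem (g.cb v.mem i)

/-- `BodyC9`: `InC9` for some ghost snapshots. -/
def BodyC9 (u₀ : State) (g : Ghost) (i : Nat) (A : Arena × List Obj) (v : State) : Prop :=
  ∃ A2 A3 Ai, InC9 u₀ g i A2 A3 Ai A v

/-- `AtC9 i`: `BodyC9` for some ghost arena. -/
def AtC9 (u₀ : State) (g : Ghost) (i : Nat) (v : State) : Prop := ∃ A, BodyC9 u₀ g i A v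

/-- K1 – K5 of the book under construction (C11 … C14): everything of `CodebookOK` but K6. -/
structure K15 (Blk : Block → Prop) (mem : Mem) (c : Nat) : Prop where
  k1 : Codebook.K1 mem c
  k2 : Codebook.K2 mem c
  k3 : Codebook.K3 Blk mem c
  k4 : Codebook.K4 Blk mem c
  k4c : Codebook.K4c mem c
  k5 : Codebook.K5 mem c

/-- K1 – K5 and K6 are `CodebookOK`. -/
theorem K15.toOK {Blk : Block → Prop} {mem : Mem} {c : Nat} (h : K15 Blk mem c) (h6 : Codebook.K6 Blk mem c) :
    CodebookOK Blk mem c :=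
  ⟨h.k1, h.k2, h.k3, h.k4, h.k4c, h.k5, h6⟩

/-- K3 over a larger block predicate. -/
theorem K3.mono {Blk Blk' : Block → Prop} {mem : Mem} {c : Nat} (h : Codebook.K3 Blk mem c) (hB : ∀ B, Blk B → Blk' B) :
    Codebook.K3 Blk' mem c :=
  ⟨fun hs => ⟨hB _ (h.dense hs).lengths, hB _ (h.dense hs).codewords⟩,
    fun hs => ⟨hB _ (h.sparse hs).lengths, (h.sparse hs).codewords_null⟩⟩

/-- K4 over a larger block predicate. -/
theorem K4.mono {Blk Blk' : Block → Prop} {mem : Mem} {c : Nat} (h : Codebook.K4 Blk mem c) (hB : ∀ B, Blk B → Blk' B) :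
    Codebook.K4 Blk' mem c :=
  ⟨fun hse => hB _ (h.sc hse), fun hse => hB _ (h.sv hse), h.sentinel, h.null⟩

/-- K1 – K5 over a larger block predicate (the arena grew; from `Since Ai Am` to `Since Ai A.1`; from `Since Ai A.1` to `A.1.Blk`). -/
theorem K15.mono {Blk Blk' : Block → Prop} {mem : Mem} {c : Nat} (h : K15 Blk mem c) (hB : ∀ B, Blk B → Blk' B) :
    K15 Blk' mem c :=
  ⟨h.k1, h.k2, K3.mono h.k3 hB, K4.mono h.k4 hB, h.k4c, h.k5⟩

/-- **FRAME of K1 – K5**: the struct at `c` is kept, and (when the book has sorted tables) its `sorted_values` block. Nothing else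
is read: the contents of `codeword_lengths`, `codewords`, `sorted_codewords` are free. -/
theorem K15.frame {Blk : Block → Prop} {mem mem' : Mem} {c : Nat} (h : K15 Blk mem c)
    (hs : (Codebook.block c).Kept mem mem')
    (hv : 1 ≤ Codebook.sorted_entries mem c → (Codebook.svBlock mem c).Kept mem mem') : K15 Blk mem' c := by
  have e : Codebook.SameFields mem mem' c := Codebook.SameFields.of_kept hs
  refine ⟨h.k1.frame e, h.k2.frame e, h.k3.frame e, h.k4.frame e ?_, h.k4c.frame e ?_, h.k5.frame e⟩
  · intro hse
    apply (hv hse).i32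
    · exact Nat.le_refl _
    · simp only []
      omega
  · intro x hx
    have hse : 1 ≤ Codebook.sorted_entries mem c := by omega
    simp only [Codebook.sorted_values_at]
    apply (hv hse).i32
    · simp only []
      omega
    · simp only []
      omega

/-- **`AtC11 i`, 0x114bad** (exit of `C9` when lookup_type ∈ {1, 2}, entry of `C11`; line 3878): CUR(i) ∧ K1 – K5 ∧ LT ∈ {1,2} ∧
E·D ≤ P (FIX 3: the 64-bit product of two non-negative ints) ∧ temps = [] ∧ c fresh at {LV, MU}. -/
structure InC11 (u₀ : State) (g : Ghost) (i : Nat) (A2 A3 Ai : Arena) (A : Arena × List Obj) (v : State) : Prop where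
  frame : Frame u₀ g pc_C11 A v
  cur : Cur g i A2 A3 Ai A v
  k : K15 (Since Ai A.1) v.mem (g.cb v.mem i)
  type_12 : Codebook.lookup_type v.mem (g.cb v.mem i) = 1 ∨ Codebook.lookup_type v.mem (g.cb v.mem i) = 2
  /-- FIX 3 -/
  prod_le : Codebook.entries v.mem (g.cb v.mem i) * Codebook.dimensions v.mem (g.cb v.mem i) ≤ 0x1FFFFFFF
  noTemps : A.1.temps = []
  lv0 : Codebook.lookup_values v.mem (g.cb v.mem i) = 0
  mu0 : Codebook.multiplicands v.mem (g.cb v.mem i) = 0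

/-- `BodyC11`: `InC11` for some ghost snapshots. -/
def BodyC11 (u₀ : State) (g : Ghost) (i : Nat) (A : Arena × List Obj) (v : State) : Prop :=
  ∃ A2 A3 Ai, InC11 u₀ g i A2 A3 Ai A v

/-- `AtC11 i`: `BodyC11` for some ghost arena. -/
def AtC11 (u₀ : State) (g : Ghost) (i : Nat) (v : State) : Prop := ∃ A, BodyC11 u₀ g i A v

/-- **The `mults` temp block** (C12 … C15): qword [R+28H] = mults ∧ P4 = TBlock(mults, 2·LV) ∧ temps = [P4] ∧ 1 ≤ LV < 2^30. -/
structure Mults (g : Ghost) (A : Arena × List Obj) (mem : Mem) (c mults : Nat) : Prop where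
  slot : mem.u64 (g.R + 0x28) = mults
  temps : TempsAre A.1 [(mults, 2 * Codebook.lookup_values mem c)]
  lv_pos : 1 ≤ Codebook.lookup_values mem c
  lv_lt : Codebook.lookup_values mem c < 2 ^ 30

/-- **`AtC12 i`, 0x114db9** (exit of `C11`, entry of `C12`; line 3899): CUR(i) ∧ K1 – K5 ∧ LT ∈ {1,2} ∧ E·D ≤ P ∧ ebx = LV ∧
1 ≤ LV < 2^30 (type 1: LV ≤ E by FIX 17) ∧ (LT = 2 → LV = E·D) ∧ 1 ≤ VB ≤ 16 ∧ qword [R+28H] = mults ∧ P4 = TBlock(mults, 2·LV) ∧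
temps = [P4] ∧ MU = 0 (contents of mults: u16, any). The arena of THIS point is the snapshot `Am` of `AtC13`. -/
structure InC12 (u₀ : State) (g : Ghost) (i : Nat) (A2 A3 Ai : Arena) (A : Arena × List Obj) (mults : Nat) (v : State) :
    Prop where
  frame : Frame u₀ g pc_C12 A v
  cur : Cur g i A2 A3 Ai A v
  k : K15 (Since Ai A.1) v.mem (g.cb v.mem i)
  type_12 : Codebook.lookup_type v.mem (g.cb v.mem i) = 1 ∨ Codebook.lookup_type v.mem (g.cb v.mem i) = 2
  prod_le : Codebook.entries v.mem (g.cb v.mem i) * Codebook.dimensions v.mem (g.cb v.mem i) ≤ 0x1FFFFFFF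
  rbx : v.reg .rbx = addr (Codebook.lookup_values v.mem (g.cb v.mem i))
  mults : Mults g A v.mem (g.cb v.mem i) mults
  /-- FIX 17 -/
  type1_lv : Codebook.lookup_type v.mem (g.cb v.mem i) = 1 →
    (Codebook.lookup_values v.mem (g.cb v.mem i) : Int) ≤ Codebook.entries v.mem (g.cb v.mem i)
  type2_lv : Codebook.lookup_type v.mem (g.cb v.mem i) = 2 →
    (Codebook.lookup_values v.mem (g.cb v.mem i) : Int) =
      Codebook.entries v.mem (g.cb v.mem i) * Codebook.dimensions v.mem (g.cb v.mem i)
  vb : 1 ≤ Codebook.value_bits v.mem (g.cb v.mem i) ∧ Codebook.value_bits v.mem (g.cb v.mem i) ≤ 16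
  mu0 : Codebook.multiplicands v.mem (g.cb v.mem i) = 0

/-- `BodyC12`: `InC12` for some ghost snapshots. -/
def BodyC12 (u₀ : State) (g : Ghost) (i : Nat) (A : Arena × List Obj) (mults : Nat) (v : State) : Prop :=
  ∃ A2 A3 Ai, InC12 u₀ g i A2 A3 Ai A mults v

/-- `AtC12 i`: `BodyC12` for some ghost arena and `mults` block. -/
def AtC12 (u₀ : State) (g : Ghost) (i : Nat) (v : State) : Prop := ∃ A mults, BodyC12 u₀ g i A mults v

/-- **`AtC13 i`, 0x115057** (exit of `C12` when LT = 1, entry of `C13` = head of loop 3910 `for (j=0; j < len; ++j)`): CUR(i) ∧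
K1 – K5 ∧ LT = 1 ∧ r12d = j ∧ 0 ≤ j ≤ N ∧ r13d = SP ∈ {0,1} ∧ dword [R+44H] = N = N(c) ∧ N·D ≤ P ∧ 1 ≤ D ≤ 65535 (K1) ∧
1 ≤ LV < 2^30 ∧ Block(MU, 4·N·D) ∧ qword [R+28H] = mults ∧ P4 = TBlock(mults, 2·LV) ∧ temps = [P4] ∧ dword [R+40H] = last (opaque
float bits: no constraint). First arrival: j = 0, last = 0. THE AGES: `Am` = the arena at `AtC12` (before the `setup_malloc` of
segment `C12`): the tables of K3, K4 are OLDER than it (`Since Ai Am`), the `multiplicands` block was allocated since — the loop's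
stores into it keep the `sorted_values` block it reads (`InC13.store_mu`). -/
structure InC13 (u₀ : State) (g : Ghost) (i : Nat) (A2 A3 Ai Am : Arena) (A : Arena × List Obj) (mults j : Nat) (v : State) :
    Prop where
  frame : Frame u₀ g pc_C13 A v
  cur : Cur g i A2 A3 Ai A v
  /-- `Am` lies between the head of the iteration and now -/
  extm : Ai.Extends Am
  extm' : Am.Extends A.1
  k : K15 (Since Ai Am) v.mem (g.cb v.mem i)
  type1 : Codebook.lookup_type v.mem (g.cb v.mem i) = 1
  r12 : v.reg .r12 = addr j
  j_le : (j : Int) ≤ Codebook.N v.mem (g.cb v.mem i)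
  r13 : v.reg .r13 = addr (Codebook.sparse v.mem (g.cb v.mem i))
  /-- len of line 3909 -/
  slot_len : v.mem.i32 (g.R + 0x44) = Codebook.N v.mem (g.cb v.mem i)
  prod_le : Codebook.N v.mem (g.cb v.mem i) * Codebook.dimensions v.mem (g.cb v.mem i) ≤ 0x1FFFFFFF
  mu : Since Am A.1 ⟨Codebook.multiplicands v.mem (g.cb v.mem i),
    4 * ((Codebook.N v.mem (g.cb v.mem i)).toNat * (Codebook.dimensions v.mem (g.cb v.mem i)).toNat)⟩
  mults : Mults g A v.mem (g.cb v.mem i) mults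

/-- `BodyC13`: `InC13` for some ghost snapshots. -/
def BodyC13 (u₀ : State) (g : Ghost) (i : Nat) (A : Arena × List Obj) (mults j : Nat) (v : State) : Prop :=
  ∃ A2 A3 Ai Am, InC13 u₀ g i A2 A3 Ai Am A mults j v

/-- `AtC13 i`: `BodyC13` for some ghost arena, `mults` block and counter `j`. -/
def AtC13 (u₀ : State) (g : Ghost) (i : Nat) (v : State) : Prop := ∃ A mults j, BodyC13 u₀ g i A mults j v

/-- **`AtC14 i`, 0x1150b9** (exit of `C12` when LT = 2, entry of `C14`; line 3933): CUR(i) ∧ K1 – K5 ∧ LT = 2 ∧ ebx = LV = E·D ∧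
1 ≤ LV ≤ P ∧ qword [R+28H] = mults ∧ P4 = TBlock(mults, 2·LV) ∧ temps = [P4] ∧ MU = 0. (The `multiplicands` block is allocated AND
filled inside segment `C14`: no snapshot is needed here.) -/
structure InC14 (u₀ : State) (g : Ghost) (i : Nat) (A2 A3 Ai : Arena) (A : Arena × List Obj) (mults : Nat) (v : State) :
    Prop where
  frame : Frame u₀ g pc_C14 A v
  cur : Cur g i A2 A3 Ai A v
  k : K15 (Since Ai A.1) v.mem (g.cb v.mem i)
  type2 : Codebook.lookup_type v.mem (g.cb v.mem i) = 2
  rbx : v.reg .rbx = addr (Codebook.lookup_values v.mem (g.cb v.mem i))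
  lv_eq : (Codebook.lookup_values v.mem (g.cb v.mem i) : Int) =
    Codebook.entries v.mem (g.cb v.mem i) * Codebook.dimensions v.mem (g.cb v.mem i)
  lv_le : Codebook.lookup_values v.mem (g.cb v.mem i) ≤ 0x1FFFFFFF
  mults : Mults g A v.mem (g.cb v.mem i) mults
  mu0 : Codebook.multiplicands v.mem (g.cb v.mem i) = 0

/-- `BodyC14`: `InC14` for some ghost snapshots. -/
def BodyC14 (u₀ : State) (g : Ghost) (i : Nat) (A : Arena × List Obj) (mults : Nat) (v : State) : Prop :=
  ∃ A2 A3 Ai, InC14 u₀ g i A2 A3 Ai A mults v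

/-- `AtC14 i`: `BodyC14` for some ghost arena and `mults` block. -/
def AtC14 (u₀ : State) (g : Ghost) (i : Nat) (v : State) : Prop := ∃ A mults, BodyC14 u₀ g i A mults v

/-- **`AtC15 i`, 0x114dfa** (`skip:`; exit of `C13` after `c->lookup_type = 2`, of `C14` at the loop exit; the `goto skip` edge of
`C12` is unreachable by K2 / FIX 4): CUR(i) ∧ CodebookOK c (every table allocated since `Ai`) ∧ qword [R+28H] = mults ∧
P4 = TBlock(mults, 2·LV) ∧ 1 ≤ LV < 2^30 ∧ temps = [P4]. -/
structure InC15 (u₀ : State) (g : Ghost) (i : Nat) (A2 A3 Ai : Arena) (A : Arena × List Obj) (mults : Nat) (v : State) :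
    Prop where
  frame : Frame u₀ g pc_C15 A v
  cur : Cur g i A2 A3 Ai A v
  ok : CodebookOK (Since Ai A.1) v.mem (g.cb v.mem i)
  mults : Mults g A v.mem (g.cb v.mem i) mults

/-- `BodyC15`: `InC15` for some ghost snapshots. -/
def BodyC15 (u₀ : State) (g : Ghost) (i : Nat) (A : Arena × List Obj) (mults : Nat) (v : State) : Prop :=
  ∃ A2 A3 Ai, InC15 u₀ g i A2 A3 Ai A mults v

/-- `AtC15 i`: `BodyC15` for some ghost arena and `mults` block. -/
def AtC15 (u₀ : State) (g : Ghost) (i : Nat) (v : State) : Prop := ∃ A mults, BodyC15 u₀ g i A mults v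

/-- The first field of every body inside an iteration is the common part `Frame` at the segment's entry (the convention of the
family: Vorbis/Spec/StartDecoderAt.lean, NAMING), whatever the ghost snapshots are. -/
theorem BodyC3.frame {u₀ : State} {g : Ghost} {i : Nat} {A : Arena × List Obj} {v : State} (h : BodyC3 u₀ g i A v) :
    Frame u₀ g pc_C3 A v := by
  obtain ⟨_, _, _, hi⟩ := h
  exact hi.frame

/-- The common part `Frame` of `BodyC4`, whatever the ghost snapshots are. -/
theorem BodyC4.frame {u₀ : State} {g : Ghost} {i : Nat} {A : Arena × List Obj} {lengths j : Nat} {v : State}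
    (h : BodyC4 u₀ g i A lengths j v) : Frame u₀ g pc_C4 A v := by
  obtain ⟨_, _, _, hi⟩ := h
  exact hi.frame

/-- The common part `Frame` of `BodyC5`, whatever the ghost snapshots are. -/
theorem BodyC5.frame {u₀ : State} {g : Ghost} {i : Nat} {A : Arena × List Obj} {lengths total : Nat} {v : State}
    (h : BodyC5 u₀ g i A lengths total v) : Frame u₀ g pc_C5 A v := by
  obtain ⟨_, _, _, hi⟩ := h
  exact hi.frame

/-- The common part `Frame` of `BodyC6`, whatever the ghost snapshots are. -/
theorem BodyC6.frame {u₀ : State} {g : Ghost} {i : Nat} {A : Arena × List Obj} {lengths count : Nat} {v : State}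
    (h : BodyC6 u₀ g i A lengths count v) : Frame u₀ g pc_C6 A v := by
  obtain ⟨_, _, _, hi⟩ := h
  exact hi.frame

/-- The common part `Frame` of `BodyC7`, whatever the ghost snapshots are. -/
theorem BodyC7.frame {u₀ : State} {g : Ghost} {i : Nat} {A : Arena × List Obj} {lengths values : Nat} {v : State}
    (h : BodyC7 u₀ g i A lengths values v) : Frame u₀ g pc_C7 A v := by
  obtain ⟨_, _, _, _, hi⟩ := h
  exact hi.frame

/-- The common part `Frame` of `BodyC8`, whatever the ghost snapshots are. -/
theorem BodyC8.frame {u₀ : State} {g : Ghost} {i : Nat} {A : Arena × List Obj} {lengths values : Nat} {v : State}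
    (h : BodyC8 u₀ g i A lengths values v) : Frame u₀ g pc_C8 A v := by
  obtain ⟨_, _, _, _, hi⟩ := h
  exact hi.frame

/-- The common part `Frame` of `BodyC9`, whatever the ghost snapshots are. -/
theorem BodyC9.frame {u₀ : State} {g : Ghost} {i : Nat} {A : Arena × List Obj} {v : State} (h : BodyC9 u₀ g i A v) :
    Frame u₀ g pc_C9 A v := by
  obtain ⟨_, _, _, hi⟩ := h
  exact hi.frame

/-- The common part `Frame` of `BodyC11`, whatever the ghost snapshots are. -/
theorem BodyC11.frame {u₀ : State} {g : Ghost} {i : Nat} {A : Arena × List Obj} {v : State} (h : BodyC11 u₀ g i A v) :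
    Frame u₀ g pc_C11 A v := by
  obtain ⟨_, _, _, hi⟩ := h
  exact hi.frame

/-- The common part `Frame` of `BodyC12`, whatever the ghost snapshots are. -/
theorem BodyC12.frame {u₀ : State} {g : Ghost} {i : Nat} {A : Arena × List Obj} {mults : Nat} {v : State}
    (h : BodyC12 u₀ g i A mults v) : Frame u₀ g pc_C12 A v := by
  obtain ⟨_, _, _, hi⟩ := h
  exact hi.frame

/-- The common part `Frame` of `BodyC13`, whatever the ghost snapshots are. -/
theorem BodyC13.frame {u₀ : State} {g : Ghost} {i : Nat} {A : Arena × List Obj} {mults j : Nat} {v : State}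
    (h : BodyC13 u₀ g i A mults j v) : Frame u₀ g pc_C13 A v := by
  obtain ⟨_, _, _, _, hi⟩ := h
  exact hi.frame

/-- The common part `Frame` of `BodyC14`, whatever the ghost snapshots are. -/
theorem BodyC14.frame {u₀ : State} {g : Ghost} {i : Nat} {A : Arena × List Obj} {mults : Nat} {v : State}
    (h : BodyC14 u₀ g i A mults v) : Frame u₀ g pc_C14 A v := by
  obtain ⟨_, _, _, hi⟩ := h
  exact hi.frame

/-- The common part `Frame` of `BodyC15`, whatever the ghost snapshots are. -/
theorem BodyC15.frame {u₀ : State} {g : Ghost} {i : Nat} {A : Arena × List Obj} {mults : Nat} {v : State}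
    (h : BodyC15 u₀ g i A mults v) : Frame u₀ g pc_C15 A v := by
  obtain ⟨_, _, _, hi⟩ := h
  exact hi.frame

/-! ### Bridges between the points (proved: they show that the exits fit the entries) -/

/-- The weaker form at the head of an iteration, from `SD4 i`. -/
theorem Cur.sd_of_sd4 {g : Ghost} {i : Nat} {A : Arena × List Obj} {mem : Mem}
    (h : Real.SD4 g.len i A (g.Blk A) (g.Live A) mem g.f g.R) : SDw g.len 3 A (g.Blk A) (g.Live A) mem g.f g.R :=
  SDw.of_sd h.toSD

/-- CM1 – CM3 over the function's block predicate, from the record over the snapshots'. -/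
theorem Cur.comment {g : Ghost} {i : Nat} {A2 A3 Ai : Arena} {A : Arena × List Obj} {v : State} (h : Cur g i A2 A3 Ai A v) :
    CommentsOK (g.Blk A) v.mem g.f :=
  CommentsOK.reblk (h.own.own.comment (by omega)) (fun B _ hb => up g A B hb)

/-- The finished books over the function's block predicate (`SD4`'s `done`), from the record over the snapshots'. -/
theorem Cur.done {g : Ghost} {i : Nat} {A2 A3 Ai : Arena} {A : Arena × List Obj} {v : State} (h : Cur g i A2 A3 Ai A v) :
    CodebooksUpTo (groups g.len) i (g.Blk A) v.mem g.f := by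
  refine ⟨(h.sd.cb0 (by omega)).1, (h.sd.cb0 (by omega)).2, ?_, ?_⟩
  · have := h.lt
    omega
  · intro j hj
    exact CodebookOK.reblk (h.own.books j hj) (fun B _ hb => up g A B hb)

/-- An error exit from inside an iteration (`call error` after an ERRSTUB): SD.ERR. -/
theorem Cur.failed {g : Ghost} {i : Nat} {A2 A3 Ai : Arena} {A : Arena × List Obj} {v : State} (h : Cur g i A2 A3 Ai A v) :
    Failed g.len g.f (g.Live A) A v.mem :=
  h.sd.failed (by omega) (CommentsOK.h1 h.comment)

/-- **The end of an iteration**: CUR(i), no temp block, and `CodebookOK cb(i)` with every table allocated SINCE the head of the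
iteration give `SD4 (i + 1)` and the record of the next head, whose snapshot `Ai` is the current arena — the `sd` and `ages` of
`AtC10 i`. -/
theorem Cur.toSD4 {g : Ghost} {i : Nat} {A2 A3 Ai : Arena} {A : Arena × List Obj} {v : State} (h : Cur g i A2 A3 Ai A v)
    (hno : A.1.temps = []) (hok : CodebookOK (Since Ai A.1) v.mem (g.cb v.mem i)) :
    Real.SD4 g.len (i + 1) A (g.Blk A) (g.Live A) v.mem g.f g.R ∧ BookTrans A2 A3 A.1 A.1 v.mem g.f (i + 1) := by
  have hok' : CodebookOK (g.Blk A) v.mem (stb_vorbis.codebooks_at v.mem g.f i) :=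
    CodebookOK.reblk hok (fun B _ hb => up g A B hb.1)
  refine ⟨?_, h.ages.succ h.lt hok⟩
  exact
    { toSD := h.sd.toSD (by omega) hno (fun h1 => absurd h1 (by omega)) (fun _ => h.comment)
      done := h.done.succ h.lt hok'
      zf := h.zf }

/-- **The head of an iteration**: `SD4 i` with its record, `i < count`, the slots and r14 give CUR(i) (ZF(i) gives ZF(i+1):
`ZF.next`); the head-of-iteration snapshot is the arena of this point. -/
theorem Cur.of_sd4 {g : Ghost} {i : Nat} {A2 A3 : Arena} {A : Arena × List Obj} {v : State}
    (h : Real.SD4 g.len i A (g.Blk A) (g.Live A) v.mem g.f g.R) (hages : BookTrans A2 A3 A.1 A.1 v.mem g.f i) (hh : g.Hand A)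
    (hlt : (i : Int) < stb_vorbis.codebook_count v.mem g.f) (hf : v.mem.u64 (g.R + 0x18) = g.f)
    (hi : v.mem.u32 (g.R + 0x30) = i) (hr : v.reg .r14 = addr (g.cb v.mem i)) : Cur g i A2 A3 A.1 A v :=
  { sd := Cur.sd_of_sd4 h
    hand := hh
    ages := hages
    zf := ZF.next h.zf
    lt := hlt
    slot_f := hf
    slot_i := hi
    r14 := hr }

/-- **After an allocation inside the iteration** (the ghost arena grew from `A` to `A'`; the memory is the allocator's return
memory in both): CUR(i) for the new arena, given the arena-dependent clauses for it (the allocator's post, `Env` rebuilt with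
`ArenaOK.runBlk_ok`). The snapshots stay: that is the point of them. -/
theorem Cur.grow {g : Ghost} {i : Nat} {A2 A3 Ai : Arena} {A A' : Arena × List Obj} {v : State} (h : Cur g i A2 A3 Ai A v)
    (hext : A.1.Extends A'.1) (hsd : SDw g.len 3 A' (g.Blk A') (g.Live A') v.mem g.f g.R) (hh : g.Hand A') :
    Cur g i A2 A3 Ai A' v :=
  { sd := hsd
    hand := hh
    ages := h.ages.grow hext
    zf := h.zf
    lt := h.lt
    slot_f := h.slot_f
    slot_i := h.slot_i
    r14 := h.r14 }

/-! ### THE PAYOFF OF THE AGES, per table of the book under construction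

Each lemma says that a store INSIDE a table of book `i` keeps what the point's assertion reads besides — the record `BookTrans`
(comment blocks, the codebooks block, the finished books) and the older tables of book `i`. `ha` = the arena layer of the moment,
`hf` = `*f` does not wrap (OB1: `Bits.ob1` + `OB1.inside`); `*f` outside the arena's buffer is `hand.objOut`. None of them was
provable from the assertions over `A.1.Blk`. -/

/-- `*f` (a stack object of stb_vorbis_open_memory) lies outside the arena's buffer. -/
theorem Cur.objOut {g : Ghost} {i : Nat} {A2 A3 Ai : Arena} {A : Arena × List Obj} {v : State} (h : Cur g i A2 A3 Ai A v) :
    g.f + Off.sizeof.stb_vorbis ≤ A.1.B ∨ A.1.B + A.1.L ≤ g.f :=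
  h.hand.objOut

/-- **`lengths` of a dense book (loops 3776 / 3786 of `C3` / `C4`, the memcpy of `C5`), and ANY table allocated since the head of the
iteration**: a store inside it keeps the record. -/
theorem Cur.store_young {g : Ghost} {i : Nat} {A2 A3 Ai : Arena} {A : Arena × List Obj} {v : State} (h : Cur g i A2 A3 Ai A v)
    (hf : g.f + Off.sizeof.stb_vorbis ≤ 2 ^ 64) {C : Block} (hC : Since Ai A.1 C) {b k : Nat} (x : Nat) (hin : C.contains b k) :
    BookTrans A2 A3 Ai A.1 (v.mem.writeLE (addr b) k x) g.f i :=
  h.ages.store_young h.sd.arena h.objOut hf hC x hin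

/-- **The struct `cb(i)` itself (every field store of the iteration; compute_accelerated_huffman's `fast_huffman`)**: a store
inside it keeps the record. -/
theorem Cur.store_book {g : Ghost} {i : Nat} {A2 A3 Ai : Arena} {A : Arena × List Obj} {v : State} (h : Cur g i A2 A3 Ai A v)
    (hf : g.f + Off.sizeof.stb_vorbis ≤ 2 ^ 64) {b k : Nat} (x : Nat) (hin : (Codebook.block (g.cb v.mem i)).contains b k) :
    BookTrans A2 A3 Ai A.1 (v.mem.writeLE (addr b) k x) g.f i :=
  h.ages.store_book h.sd.arena h.objOut hf h.lt x hin

/-- **The struct `cb(i)` is kept by a store into a table of book `i`** (so K1, K2, K5 and the pointer fields of the book under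
construction read the same): the struct lies in the codebooks block, a block of the head-of-iteration snapshot. -/
theorem Cur.book_kept {g : Ghost} {i : Nat} {A2 A3 Ai : Arena} {A : Arena × List Obj} {v : State} (h : Cur g i A2 A3 Ai A v)
    {C : Block} (hC : Since Ai A.1 C) {b k : Nat} (x : Nat) (hin : C.contains b k) :
    (Codebook.block (g.cb v.mem i)).Kept v.mem (v.mem.writeLE (addr b) k x) := by
  have hcb := h.ages.cbOK
  have hk := h.sd.arena.kept_of_store_since h.ages.exti hcb.F2 hC x hin
  have hci := hcb.cb_in i h.lt
  simp only [vblock] at hci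
  exact hk.mono hci.1 hci.2

/-- **A table of book `i` is kept by a store into the struct `cb(i)`** (the other direction: `sorted_values` while
compute_accelerated_huffman fills `fast_huffman`, while the fields `lookup_type` … `multiplicands` are stored). -/
theorem Cur.young_kept {g : Ghost} {i : Nat} {A2 A3 Ai : Arena} {A : Arena × List Obj} {v : State} (h : Cur g i A2 A3 Ai A v)
    {B : Block} (hB : Since Ai A.1 B) {b k : Nat} (x : Nat) (hin : (Codebook.block (g.cb v.mem i)).contains b k) :
    B.Kept v.mem (v.mem.writeLE (addr b) k x) := by
  have hcb := h.ages.cbOK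
  have hci := hcb.cb_in i h.lt
  have hinCb : (codebooksBlock v.mem g.f).contains b k := by
    unfold Ghost.cb at hin
    simp only [vblock] at hci hin ⊢
    omega
  exact h.sd.arena.kept_of_store_old h.ages.exti hB hcb.F2 x hinCb

/-- **K1 – K5 of the book under construction over a store into a YOUNGER table** (`multiplicands` while `sorted_values` is read): the
blocks of K3, K4 were allocated before the snapshot `Am`, the store goes into a block allocated since; the struct `cb(i)` lies in
the codebooks block, older still. (Over a store into the struct itself K1 – K5 is no frame fact: the store changes a field.) -/
theorem K15.store_later {g : Ghost} {i : Nat} {A2 A3 Ai Am : Arena} {A : Arena × List Obj} {v : State}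
    (h : Cur g i A2 A3 Ai A v) (extm : Ai.Extends Am) (extm' : Am.Extends A.1)
    (hk : K15 (Since Ai Am) v.mem (g.cb v.mem i)) {C : Block} (hC : Since Am A.1 C) {b k : Nat} (x : Nat)
    (hin : C.contains b k) : K15 (Since Ai Am) (v.mem.writeLE (addr b) k x) (g.cb v.mem i) := by
  apply hk.frame
  · exact h.book_kept (hC.older extm) x hin
  · intro hse
    exact h.sd.arena.kept_of_store_later extm' (hk.k4.sv hse) hC x hin

/-- **`multiplicands` of a type-1 book (loop 3910 of `C13`)**: a store inside it keeps the record, K1 – K5 of the book (the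
`sorted_values` block the loop reads, the struct) — the invariant of the loop but for its counter. -/
theorem InC13.store_mu {u₀ : State} {g : Ghost} {i : Nat} {A2 A3 Ai Am : Arena} {A : Arena × List Obj} {mults j : Nat}
    {v : State} (h : InC13 u₀ g i A2 A3 Ai Am A mults j v) (hf : g.f + Off.sizeof.stb_vorbis ≤ 2 ^ 64) {b k : Nat} (x : Nat)
    (hin : (Block.mk (Codebook.multiplicands v.mem (g.cb v.mem i))
      (4 * ((Codebook.N v.mem (g.cb v.mem i)).toNat * (Codebook.dimensions v.mem (g.cb v.mem i)).toNat))).contains b k) :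
    BookTrans A2 A3 Ai A.1 (v.mem.writeLE (addr b) k x) g.f i ∧
      K15 (Since Ai Am) (v.mem.writeLE (addr b) k x) (g.cb v.mem i) :=
  ⟨h.cur.store_young hf (h.mu.older h.extm) x hin, K15.store_later h.cur h.extm h.extm' h.k h.mu x hin⟩

/-- K3n of a dense book between `C6` and `C8`, over the blocks allocated since the head of the iteration. -/
theorem Built.dense_k3 {g : Ghost} {i : Nat} {A2 A3 Ai Aw : Arena} {A : Arena × List Obj} {lengths values : Nat} {v : State}
    (h : Built g i A2 A3 Ai Aw A lengths values v) (hs : Codebook.sparse v.mem (g.cb v.mem i) = 0) :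
    Codebook.K3n (Since Ai A.1) v.mem (g.cb v.mem i) :=
  ⟨(h.dense_lengths hs).mono h.extw', (h.dense_codewords hs).older h.extw⟩

/-- The final `codeword_lengths` block of a sparse book, over the blocks allocated since the head of the iteration. -/
theorem Built.sparse_k3 {g : Ghost} {i : Nat} {A2 A3 Ai Aw : Arena} {A : Arena × List Obj} {lengths values : Nat} {v : State}
    (h : Built g i A2 A3 Ai Aw A lengths values v) (hs : Codebook.sparse v.mem (g.cb v.mem i) = 1) :
    Since Ai A.1 ⟨Codebook.codeword_lengths v.mem (g.cb v.mem i), (Codebook.sorted_entries v.mem (g.cb v.mem i)).toNat⟩ :=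
  (h.sparse_lengths hs).older h.extw

/-- **`codewords` of a dense book (compute_codewords' `add_entry` stores, `C7`)**: a store inside it keeps the record AND the
`lengths` block the same loop re-reads — `lengths` was allocated before the snapshot `Aw`, `codewords` since. -/
theorem Built.store_codewords {g : Ghost} {i : Nat} {A2 A3 Ai Aw : Arena} {A : Arena × List Obj} {lengths values : Nat}
    {v : State} (h : Built g i A2 A3 Ai Aw A lengths values v) (hs : Codebook.sparse v.mem (g.cb v.mem i) = 0)
    (hf : g.f + Off.sizeof.stb_vorbis ≤ 2 ^ 64) {b k : Nat} (x : Nat)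
    (hin : (Block.mk (Codebook.codewords v.mem (g.cb v.mem i)) (4 * (Codebook.entries v.mem (g.cb v.mem i)).toNat)).contains
      b k) :
    BookTrans A2 A3 Ai A.1 (v.mem.writeLE (addr b) k x) g.f i ∧
      (Block.mk lengths (Codebook.entries v.mem (g.cb v.mem i)).toNat).Kept v.mem (v.mem.writeLE (addr b) k x) ∧
      (Codebook.block (g.cb v.mem i)).Kept v.mem (v.mem.writeLE (addr b) k x) := by
  have hcw := h.dense_codewords hs
  have hcwi : Since Ai A.1 _ := hcw.older h.extw
  refine ⟨h.cur.store_young hf hcwi x hin, ?_, h.cur.book_kept hcwi x hin⟩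
  rw [h.dense_eq hs]
  exact h.cur.sd.arena.kept_of_store_later h.extw' (h.dense_lengths hs) hcw x hin

/-- **compute_codewords' precondition `apartDense`** (S3: Vorbis/Spec/Codebook.lean, `CodewordsPre`) at `AtC7`, a dense book: the
struct, `lengths[0 .. E)` and the `codewords` block are pairwise disjoint — three blocks of three different ages. (`cwBlock` of
S3 is `⟨codewords, 4·N(c)⟩` with `N(c) = entries` for a dense book.) -/
theorem Built.apartDense {g : Ghost} {i : Nat} {A2 A3 Ai Aw : Arena} {A : Arena × List Obj} {lengths values : Nat} {v : State}
    (h : Built g i A2 A3 Ai Aw A lengths values v) (hs : Codebook.sparse v.mem (g.cb v.mem i) = 0) :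
    Apart [Codebook.block (g.cb v.mem i), ⟨lengths, (Codebook.entries v.mem (g.cb v.mem i)).toNat⟩,
      ⟨Codebook.codewords v.mem (g.cb v.mem i), 4 * (Codebook.N v.mem (g.cb v.mem i)).toNat⟩] := by
  have ha := h.cur.sd.arena
  have hcb := h.cur.ages.cbOK
  have hci := hcb.cb_in i h.cur.lt
  have hl := h.dense_lengths hs
  have hcw := h.dense_codewords hs
  rw [← h.dense_eq hs] at hl
  rw [Codebook.N_dense hs]
  -- the codebooks block against the two tables, the two tables against each other
  have d1 := ha.old_disjoint_since h.cur.ages.exti hcb.F2 (hl.mono h.extw')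
  have d2 := ha.old_disjoint_since h.cur.ages.exti hcb.F2 (hcw.older h.extw)
  have d3 := ha.since_disjoint_since h.extw' hl hcw
  unfold Ghost.cb at *
  simp only [Apart, List.pairwise_cons, List.mem_cons, or_false, forall_eq_or_imp, forall_eq,
    List.not_mem_nil, false_imp_iff, implies_true, List.Pairwise.nil, and_true]
  simp only [vblock] at hci d1 d2 d3 ⊢
  omega

/-- **The tables segment `C8` allocates itself (`sorted_codewords`, `sorted_values`: the FIX 7 memset, `[-1] = -1`,
compute_sorted_huffman's stores) — and any block allocated after `AtC7` / `AtC8`**: the ghost arena grew from `A` to `A'`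
(`ArenaOK.since_pushSetup` gives `hC` at the call), a store inside the new block keeps the record and every table of book `i` that
existed at the cut point: `lengths`, `codewords` of a dense book, the final `codeword_lengths` of a sparse one. -/
theorem Built.store_later {g : Ghost} {i : Nat} {A2 A3 Ai Aw : Arena} {A : Arena × List Obj} {lengths values : Nat}
    {v : State} (h : Built g i A2 A3 Ai Aw A lengths values v) {A' : Arena} {others' : List Obj} {mem : Mem}
    (hext : A.1.Extends A') (ha' : ArenaOK A' others' mem g.f) (hages : BookTrans A2 A3 Ai A' mem g.f i)
    (hout : g.f + Off.sizeof.stb_vorbis ≤ A'.B ∨ A'.B + A'.L ≤ g.f) (hf : g.f + Off.sizeof.stb_vorbis ≤ 2 ^ 64)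
    {C : Block} (hC : Since A.1 A' C) {b k : Nat} (x : Nat) (hin : C.contains b k) :
    BookTrans A2 A3 Ai A' (mem.writeLE (addr b) k x) g.f i ∧ AllKept A.1.Blk mem (mem.writeLE (addr b) k x) :=
  ⟨hages.store_young ha' hout hf (hC.older (h.cur.ages.exti)) x hin, ha'.allKept_of_store_since hext hC x hin⟩

/-! ### THE STATEMENTS OF THE SEGMENTS (what the unit files `Vorbis/Spec/Units/start_decoder_<seg>.lean` conclude)

`Seg<seg> Lay μ u₀`: from every state that satisfies the segment's entry assertion the machine reaches — every state on the way
being in `WayInv` (not at `__asan_report`, RIP inside the text) — a state that satisfies the entry assertion of one of its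
successor segments. Termination of the loops INSIDE a segment is part of it (`ReachVia` reaches). -/

/-- **Segment `start_decoder.1`** (the prologue: six pushes, `sub rsp, 598H`, the frame header words, the spill of `base >> 3`, the 11 inline shadow stores (the frame gets POISONED: `ShadowInv.prologue_ra`). No call, no check). -/
def Seg1 (Lay : Layout) (μ : Microarch) (u₀ : State) : Prop :=
  ∀ (g : Ghost) (v : State), At1 u₀ g v → ReachVia Lay μ WayInv v (fun w => At2 u₀ g w)

/-- **Segment `start_decoder.2`** (`first_decode = TRUE`, the first start_page, the page-flag / segment tests (exports Z10 and ONE20), the fishead diagnosis, the packet id). -/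
def Seg2 (Lay : Layout) (μ : Microarch) (u₀ : State) : Prop :=
  ∀ (g : Ghost) (v : State), At2 u₀ g v → ReachVia Lay μ WayInv v (fun w => At3 u₀ g w ∨ AtERR u₀ g w)

/-- **Segment `start_decoder.3`** (the identification header fields: HD1 – HD3 (the stores come BEFORE the tests)). -/
def Seg3 (Lay : Layout) (μ : Microarch) (u₀ : State) : Prop :=
  ∀ (g : Ghost) (v : State), At3 u₀ g v → ReachVia Lay μ WayInv v (fun w => At4 u₀ g w ∨ AtERR u₀ g w)

/-- **Segment `start_decoder.4`** (the second page, start_packet, the first segment, packet type 3, `i = 0`). -/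
def Seg4 (Lay : Layout) (μ : Microarch) (u₀ : State) : Prop :=
  ∀ (g : Ghost) (v : State), At4 u₀ g v → ReachVia Lay μ WayInv v (fun w => At5 u₀ g w ∨ AtERR u₀ g w)

/-- **Segment `start_decoder.5`** (loop 3676 (header[i] = get8_packet), vorbis_validate, the vendor length (FIX 1), the vendor allocation). -/
def Seg5 (Lay : Layout) (μ : Microarch) (u₀ : State) : Prop :=
  ∀ (g : Ghost) (v : State), At5 u₀ g v → ReachVia Lay μ WayInv v (fun w => At6 u₀ g w ∨ AtERR u₀ g w)

/-- **Segment `start_decoder.6`** (loop 3682 (the vendor bytes), the terminator, `comment_list_length` + FIX 2, the comment_list allocation + FIX 12 (zero fill), `i = 0`). -/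
def Seg6 (Lay : Layout) (μ : Microarch) (u₀ : State) : Prop :=
  ∀ (g : Ghost) (v : State), At6 u₀ g v → ReachVia Lay μ WayInv v (fun w => At7 u₀ g w ∨ AtERR u₀ g w)

/-- **Segment `start_decoder.7`** (loop 3695 (one comment per iteration: FIX 1, the allocation, the byte loop 3700, the terminator)). -/
def Seg7 (Lay : Layout) (μ : Microarch) (u₀ : State) : Prop :=
  ∀ (g : Ghost) (v : State), At7 u₀ g v → ReachVia Lay μ WayInv v (fun w => At8 u₀ g w ∨ AtERR u₀ g w)

/-- **Segment `start_decoder.8`** (the framing bit; the do-while of line 3715 that skips the rest of the comment packet (terminates by the measure μ of Vorbis/Bits.lean; exports Z24)). -/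
def Seg8 (Lay : Layout) (μ : Microarch) (u₀ : State) : Prop :=
  ∀ (g : Ghost) (v : State), At8 u₀ g v → ReachVia Lay μ WayInv v (fun w => At9 u₀ g w ∨ AtERR u₀ g w)

/-- **Segment `start_decoder.9`** (the third packet start, crc32_init, packet type 5, loop 3737, `codebook_count`, the codebooks block, its memset). -/
def Seg9 (Lay : Layout) (μ : Microarch) (u₀ : State) : Prop :=
  ∀ (g : Ghost) (v : State), At9 u₀ g v → ReachVia Lay μ WayInv v (fun w => AtC1 u₀ g w ∨ AtERR u₀ g w)

/-- **Segment `start_decoder.C1`** (`i = 0` (the literal 0 of [R+24H] to [R+30H]), the spill of f to [R+18H]). -/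
def SegC1 (Lay : Layout) (μ : Microarch) (u₀ : State) : Prop :=
  ∀ (g : Ghost) (v : State), AtC1 u₀ g v → ReachVia Lay μ WayInv v (fun w => AtC2 u₀ g 0 w)

/-- **Segment `start_decoder.C2`** (the head of the codebook loop: `i < count`?, c = codebooks + i, the sync pattern, dimensions, entries, ordered, sparse (Z10 is read), FIX 6, the allocation of `lengths`, the dispatch on `ordered`). -/
def SegC2 (Lay : Layout) (μ : Microarch) (u₀ : State) : Prop :=
  ∀ (g : Ghost) (i : Nat) (v : State), AtC2 u₀ g i v → ReachVia Lay μ WayInv v (fun w => AtC3 u₀ g i w ∨ AtC4 u₀ g i w ∨ AtC16 u₀ g w ∨ AtERR u₀ g w)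

/-- **Segment `start_decoder.C3`** (the ORDERED lengths: loop 3776, run-length fill by memset (≤ 32 rounds: `current_length` grows every round)). -/
def SegC3 (Lay : Layout) (μ : Microarch) (u₀ : State) : Prop :=
  ∀ (g : Ghost) (i : Nat) (v : State), AtC3 u₀ g i v → ReachVia Lay μ WayInv v (fun w => AtC5 u₀ g i w ∨ AtERR u₀ g w)

/-- **Segment `start_decoder.C4`** (the UNORDERED lengths: loop 3786 (present bit, 5-bit length, NO_CODE), counting `total`). -/
def SegC4 (Lay : Layout) (μ : Microarch) (u₀ : State) : Prop :=
  ∀ (g : Ghost) (i : Nat) (v : State), AtC4 u₀ g i v → ReachVia Lay μ WayInv v (fun w => AtC5 u₀ g i w ∨ AtERR u₀ g w)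

/-- **Segment `start_decoder.C5`** (the sparse → dense conversion (setup_malloc, memcpy, setup_temp_free of P1, `sparse = 0`); `sorted_count` (loop 3818 for a dense book)). -/
def SegC5 (Lay : Layout) (μ : Microarch) (u₀ : State) : Prop :=
  ∀ (g : Ghost) (i : Nat) (v : State), AtC5 u₀ g i v → ReachVia Lay μ WayInv v (fun w => AtC6 u₀ g i w ∨ AtERR u₀ g w)

/-- **Segment `start_decoder.C6`** (`sorted_entries = sorted_count`, FIX 4, the allocations of codewords / codeword_lengths / P2 / P3, the `size` statistic). -/
def SegC6 (Lay : Layout) (μ : Microarch) (u₀ : State) : Prop :=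
  ∀ (g : Ghost) (i : Nat) (v : State), AtC6 u₀ g i v → ReachVia Lay μ WayInv v (fun w => AtC7 u₀ g i w ∨ AtERR u₀ g w)

/-- **Segment `start_decoder.C7`** (compute_codewords; on failure `setup_temp_free(f, values, 0)` — setup_temp_free's MACHINE-LEVEL contract (`weakSpec`), not the LIFO one — and `error`). -/
def SegC7 (Lay : Layout) (μ : Microarch) (u₀ : State) : Prop :=
  ∀ (g : Ghost) (i : Nat) (v : State), AtC7 u₀ g i v → ReachVia Lay μ WayInv v (fun w => AtC8 u₀ g i w ∨ AtERR u₀ g w)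

/-- **Segment `start_decoder.C8`** (the sorted tables (two setup_malloc, FIX 7 memset, `++sorted_values`, `[-1] = -1`, compute_sorted_huffman); the three frees P3, P2, P1; `codewords = NULL`). -/
def SegC8 (Lay : Layout) (μ : Microarch) (u₀ : State) : Prop :=
  ∀ (g : Ghost) (i : Nat) (v : State), AtC8 u₀ g i v → ReachVia Lay μ WayInv v (fun w => AtC9 u₀ g i w ∨ AtERR u₀ g w)

/-- **Segment `start_decoder.C9`** (compute_accelerated_huffman (K5), `lookup_type = get_bits(4)` (`> 2` rejected), FIX 3, the dispatch on lookup_type). -/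
def SegC9 (Lay : Layout) (μ : Microarch) (u₀ : State) : Prop :=
  ∀ (g : Ghost) (i : Nat) (v : State), AtC9 u₀ g i v → ReachVia Lay μ WayInv v (fun w => AtC10 u₀ g i w ∨ AtC11 u₀ g i w ∨ AtERR u₀ g w)

/-- **Segment `start_decoder.C10`** (`++i`). -/
def SegC10 (Lay : Layout) (μ : Microarch) (u₀ : State) : Prop :=
  ∀ (g : Ghost) (i : Nat) (v : State), AtC10 u₀ g i v → ReachVia Lay μ WayInv v (fun w => AtC2 u₀ g (i + 1) w)

/-- **Segment `start_decoder.C11`** (minimum_value, delta_value, value_bits, sequence_p, lookup_values (type 1: lookup1_values + FIX 17; type 2: entries·dimensions), `== 0` rejected, P4 = mults, loop 3892). -/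
def SegC11 (Lay : Layout) (μ : Microarch) (u₀ : State) : Prop :=
  ∀ (g : Ghost) (i : Nat) (v : State), AtC11 u₀ g i v → ReachVia Lay μ WayInv v (fun w => AtC12 u₀ g i w ∨ AtERR u₀ g w)

/-- **Segment `start_decoder.C12`** (type 1: the multiplicands allocation (4·N·D), `len = N`, `last = 0`, `j = 0`; type 2: on to C14. The `goto skip` edge (sparse ∧ sorted_entries = 0) is UNREACHABLE by K2 (FIX 4): not an exit). -/
def SegC12 (Lay : Layout) (μ : Microarch) (u₀ : State) : Prop :=
  ∀ (g : Ghost) (i : Nat) (v : State), AtC12 u₀ g i v → ReachVia Lay μ WayInv v (fun w => AtC13 u₀ g i w ∨ AtC14 u₀ g i w ∨ AtERR u₀ g w)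

/-- **Segment `start_decoder.C13`** (the TYPE-1 EXPANSION: loops 3910 / 3913 with the two `div` (divisors `div ≥ 1`, `LV ≥ 1`) and `mul ; jo`; `lookup_type = 2`). -/
def SegC13 (Lay : Layout) (μ : Microarch) (u₀ : State) : Prop :=
  ∀ (g : Ghost) (i : Nat) (v : State), AtC13 u₀ g i v → ReachVia Lay μ WayInv v (fun w => AtC15 u₀ g i w ∨ AtERR u₀ g w)

/-- **Segment `start_decoder.C14`** (TYPE 2: the multiplicands allocation (4·LV), loop 3937). -/
def SegC14 (Lay : Layout) (μ : Microarch) (u₀ : State) : Prop :=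
  ∀ (g : Ghost) (i : Nat) (v : State), AtC14 u₀ g i v → ReachVia Lay μ WayInv v (fun w => AtC15 u₀ g i w ∨ AtERR u₀ g w)

/-- **Segment `start_decoder.C15`** (`skip:` setup_temp_free of P4). -/
def SegC15 (Lay : Layout) (μ : Microarch) (u₀ : State) : Prop :=
  ∀ (g : Ghost) (i : Nat) (v : State), AtC15 u₀ g i v → ReachVia Lay μ WayInv v (fun w => AtC10 u₀ g i w)

/-- **Segment `start_decoder.C16`** (the time-domain transfers: loop 3957 (`x = get_bits(6) + 1` rounds of `get_bits(16)`, each must be 0); reloads rbp = f). -/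
def SegC16 (Lay : Layout) (μ : Microarch) (u₀ : State) : Prop :=
  ∀ (g : Ghost) (v : State), AtC16 u₀ g v → ReachVia Lay μ WayInv v (fun w => AtF1 u₀ g w ∨ AtERR u₀ g w)

end Vorbis.Spec.StartDecoder
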